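-- pv_equiv track=rewrite | github.com/lukyday007/coding-test | python/programmers/lv2_oil_drilling.py | solution
-- ===== SOURCE A (Python) =====
-- from collections import deque
-- from collections import deque
-- from collections import deque
--
-- def solution(land):
--    R = len(land)
--    C = len(land[0])
--    maxV = 0
--
--    def bfs(pos, R, C):
--       visit = [[0 for _ in range(C)] for _ in range(R)]
--       Q = deque()
--
--       for r in range(R):
--          if land[r][pos]:
--             visit[r][pos] = 1
--             Q.append((r, pos))
--
--       oil = 0
--
--       while Q:
--          cr, cc = Q.popleft()
--          if land[cr][cc]:
--             oil += 1
--
--          for d in range(4):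
--             nr, nc = cr + dr[d], cc + dc[d]
--             if nr < 0 or nr >= R or nc < 0 or nc >= C: continue
--             if land[nr][nc] and visit[nr][nc] == 0:
--                Q.append((nr, nc))
--                visit[nr][nc] = 1
--
--       return oil
--
--    for c in range(C):
--       val = bfs(c, R, C)
--       maxV = max(val, maxV)
--
--    return maxV
--
-- dr = [1, -1, 0, 0]
--
-- dc = [0, 0, 1, -1]
-- ===== SOURCE B (Python) =====
-- from collections import deque
--
-- def solution(land):
--     R = len(land)
--     C = len(land[0])
--     comp = {}
--     sizes = []
--     for r in range(R):
--         for c in range(C):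
--             if land[r][c] and (r, c) not in comp:
--                 lbl = len(sizes)
--                 comp[(r, c)] = lbl
--                 Q = deque([(r, c)])
--                 size = 0
--                 while Q:
--                     cr, cc = Q.popleft()
--                     size += 1
--                     for n in ((cr + 1, cc), (cr - 1, cc), (cr, cc + 1), (cr, cc - 1)):
--                         if 0 <= n[0] < R and 0 <= n[1] < C and land[n[0]][n[1]] and n not in comp:
--                             comp[n] = lbl
--                             Q.append(n)
--                 sizes.append(size)
--     best = 0
--     for c in range(C):
--         total = 0
--         seen = set()
--         for r in range(R):
--             if land[r][c]:
--                 lbl = comp[(r, c)]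
--                 if lbl not in seen:
--                     seen.add(lbl)
--                     total += sizes[lbl]
--         best = max(best, total)
--     return best
-- ===== Notes on version B (the rewrite author's own statement) =====
-- stated objective: faster
-- what changed: A runs a fresh whole-grid BFS from every column (O(R*C) work per column); B labels each connected component once with a single multi-pass BFS labelling and then, per column, sums the sizes of the distinct component labels seen in that column.
import Mathlib
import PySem

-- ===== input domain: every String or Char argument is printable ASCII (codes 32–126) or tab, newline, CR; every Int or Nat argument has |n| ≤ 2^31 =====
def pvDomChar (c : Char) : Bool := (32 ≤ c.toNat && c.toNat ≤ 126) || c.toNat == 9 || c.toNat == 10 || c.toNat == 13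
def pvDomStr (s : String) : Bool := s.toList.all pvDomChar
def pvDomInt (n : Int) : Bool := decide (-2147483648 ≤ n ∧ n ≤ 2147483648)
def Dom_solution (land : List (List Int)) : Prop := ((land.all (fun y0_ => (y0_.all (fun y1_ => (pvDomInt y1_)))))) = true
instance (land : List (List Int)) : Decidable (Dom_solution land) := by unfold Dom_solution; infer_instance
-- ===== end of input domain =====

-- B replaces A's per-column whole-grid BFS by a single component labelling plus per-column sums of distinct component sizes (asymptotically faster).

-- ===== PORT A =====
def dr : List Int := [1, -1, 0, 0]
def dc : List Int := [0, 0, 1, -1]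

-- land[r][c] (only evaluated under in-range guards in both Pythons)
def aGet (land : List (List Int)) (r c : Int) : Int :=
  PySem.List.pyGetD (PySem.List.pyGetD land r []) c 0

-- visit[r][c] = 1
def aSet (v : List (List Int)) (r c : Int) : List (List Int) :=
  PySem.List.pySetD v r (PySem.List.pySetD (PySem.List.pyGetD v r []) c 1)

-- the `while Q:` loop of A's bfs (fuel makes the recursion structural; it is always sufficient)
def aLoop (land : List (List Int)) (R C : Int) :
    Nat → List (Int × Int) → List (List Int) → Int → Int
  | 0, _, _, oil => oil
  | _ + 1, [], _, oil => oil
  | fuel + 1, (cr, cc) :: Q, visit, oil =>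
    let oil' := if aGet land cr cc ≠ 0 then oil + 1 else oil
    let st := (PySem.List.pyRange 0 4 1).foldl
      (fun (st : List (Int × Int) × List (List Int)) d =>
        let nr := cr + PySem.List.pyGetD dr d 0
        let nc := cc + PySem.List.pyGetD dc d 0
        if nr < 0 ∨ R ≤ nr ∨ nc < 0 ∨ C ≤ nc then st
        else if aGet land nr nc ≠ 0 ∧ aGet st.2 nr nc = 0 then
          (st.1 ++ [(nr, nc)], aSet st.2 nr nc)
        else st) (Q, visit)
    aLoop land R C fuel st.1 st.2 oil'

def aBfs (land : List (List Int)) (pos R C : Int) : Int :=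
  let visit0 : List (List Int) :=
    (PySem.List.pyRange 0 R 1).map (fun _ => (PySem.List.pyRange 0 C 1).map (fun _ => (0 : Int)))
  let st := (PySem.List.pyRange 0 R 1).foldl
    (fun (st : List (List Int) × List (Int × Int)) r =>
      if aGet land r pos ≠ 0 then (aSet st.1 r pos, st.2 ++ [(r, pos)]) else st)
    (visit0, [])
  aLoop land R C (5 * R.toNat * C.toNat + R.toNat + 1) st.2 st.1 0

def solution (land : List (List Int)) : Int :=
  let R : Int := land.length
  let C : Int := (PySem.List.pyGetD land 0 []).length
  (PySem.List.pyRange 0 C 1).foldl (fun maxV c => max (aBfs land c R C) maxV) 0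

-- ===== PORT B =====
def bGet (land : List (List Int)) (r c : Int) : Int :=
  PySem.List.pyGetD (PySem.List.pyGetD land r []) c 0

def bNbrs (p : Int × Int) : List (Int × Int) :=
  [(p.1 + 1, p.2), (p.1 - 1, p.2), (p.1, p.2 + 1), (p.1, p.2 - 1)]

-- the component-filling `while Q:` loop of B (fuel is always sufficient)
def bLoop (land : List (List Int)) (R C lbl : Int) :
    Nat → List (Int × Int) → PySem.Dict (Int × Int) Int → Int →
    PySem.Dict (Int × Int) Int × Int
  | 0, _, comp, size => (comp, size)
  | _ + 1, [], comp, size => (comp, size)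
  | fuel + 1, p :: Q, comp, size =>
    let st := (bNbrs p).foldl
      (fun (st : List (Int × Int) × PySem.Dict (Int × Int) Int) n =>
        if 0 ≤ n.1 ∧ n.1 < R ∧ 0 ≤ n.2 ∧ n.2 < C ∧ bGet land n.1 n.2 ≠ 0 ∧
            st.2.contains n = false then
          (st.1 ++ [n], st.2.insert n lbl)
        else st) (Q, comp)
    bLoop land R C lbl fuel st.1 st.2 (size + 1)

-- the double `for r / for c` labelling pass
def bLabel (land : List (List Int)) (R C : Int) : PySem.Dict (Int × Int) Int × List Int :=
  (PySem.List.pyRange 0 R 1).foldl (fun st r =>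
    (PySem.List.pyRange 0 C 1).foldl
      (fun (st : PySem.Dict (Int × Int) Int × List Int) c =>
        if bGet land r c ≠ 0 ∧ st.1.contains (r, c) = false then
          let lbl : Int := st.2.length
          let res := bLoop land R C lbl (5 * R.toNat * C.toNat + R.toNat + 1)
            [(r, c)] (st.1.insert (r, c) lbl) 0
          (res.1, st.2 ++ [res.2])
        else st) st) (PySem.Dict.empty, [])

-- one column's total of distinct component sizes
def bColSum (land : List (List Int)) (comp : PySem.Dict (Int × Int) Int)
    (sizes : List Int) (R c : Int) : Int :=
  ((PySem.List.pyRange 0 R 1).foldl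
    (fun (st : Int × PySem.Set Int) r =>
      if bGet land r c ≠ 0 then
        let lbl := comp.getD (r, c) 0
        if PySem.Set.contains st.2 lbl = false then
          (st.1 + PySem.List.pyGetD sizes lbl 0, PySem.Set.add st.2 lbl)
        else st
      else st) ((0 : Int), PySem.Set.empty)).1

def solution_alt (land : List (List Int)) : Int :=
  let R : Int := land.length
  let C : Int := (PySem.List.pyGetD land 0 []).length
  let cs := bLabel land R C
  (PySem.List.pyRange 0 C 1).foldl (fun best c => max best (bColSum land cs.1 cs.2 R c)) 0



-- ===== PRECONDITION & SPEC =====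
-- Pre_ excludes exactly the inputs where the Pythons raise IndexError: empty land
-- (len(land[0])) and rows shorter than the first row (land[r][c] for c < C).
def Pre_solution (land : List (List Int)) : Prop :=
  land ≠ [] ∧ ∀ row ∈ land, (land.headD []).length ≤ row.length
instance (land : List (List Int)) : Decidable (Pre_solution land) := by
  unfold Pre_solution; infer_instance

def pvWitness_solution : List (List Int) := [[1, 0], [1, 1]]

def Spec_solution (land : List (List Int)) (out : Int) : Prop := out = solution_alt land
instance (land : List (List Int)) (out : Int) : Decidable (Spec_solution land out) := by
  unfold Spec_solution; infer_instance

-- ===== CLAIM (what is proved, stated in full; the proofs are below) =====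
def Claim_equal_solution : Prop :=
  ∀ (land : List (List Int)), Dom_solution land → Pre_solution land →
    Spec_solution land (solution land)

-- ===== LEMMAS AND PROOFS =====

def isCell (land : List (List Int)) (R C : Int) (p : Int × Int) : Bool :=
  decide (0 ≤ p.1) && decide (p.1 < R) && decide (0 ≤ p.2) && decide (p.2 < C) &&
  decide (aGet land p.1 p.2 ≠ 0)

noncomputable def cellsF (land : List (List Int)) (R C : Int) : Finset (Int × Int) :=
  (Finset.Icc 0 (R - 1) ×ˢ Finset.Icc 0 (C - 1)).filter (fun p => isCell land R C p = true)

theorem mem_cellsF {land : List (List Int)} {R C : Int} {p : Int × Int} :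
    p ∈ cellsF land R C ↔ isCell land R C p = true := by
  simp only [cellsF, Finset.mem_filter, Finset.mem_product, Finset.mem_Icc, isCell,
    Bool.and_eq_true, decide_eq_true_eq, and_iff_right_iff_imp]
  omega

theorem card_cellsF_le (land : List (List Int)) (R C : Int) :
    (cellsF land R C).card ≤ R.toNat * C.toNat := by
  calc (cellsF land R C).card ≤ (Finset.Icc (0:Int) (R-1) ×ˢ Finset.Icc (0:Int) (C-1)).card :=
        Finset.card_filter_le _ _
    _ = (Finset.Icc (0:Int) (R-1)).card * (Finset.Icc (0:Int) (C-1)).card := Finset.card_product ..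
    _ = R.toNat * C.toNat := by rw [Int.card_Icc, Int.card_Icc]; congr 1 <;> omega

def adjStep (land : List (List Int)) (R C : Int) (p q : Int × Int) : Prop :=
  isCell land R C p = true ∧ isCell land R C q = true ∧ q ∈ bNbrs p

theorem adjStep_symm {land : List (List Int)} {R C : Int} {p q : Int × Int}
    (h : adjStep land R C p q) : adjStep land R C q p := by
  obtain ⟨hp, hq, hm⟩ := h
  refine ⟨hq, hp, ?_⟩
  obtain ⟨a, b⟩ := p; obtain ⟨x, y⟩ := q
  simp only [bNbrs, List.mem_cons, List.not_mem_nil, or_false, Prod.mk.injEq] at hm ⊢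
  omega

def reach (land : List (List Int)) (R C : Int) (p q : Int × Int) : Prop :=
  Relation.ReflTransGen (adjStep land R C) p q

theorem reach_symm {land : List (List Int)} {R C : Int} {p q : Int × Int}
    (h : reach land R C p q) : reach land R C q p :=
  (Relation.ReflTransGen.symmetric (fun _ _ => adjStep_symm)) h

noncomputable def reachSet (land : List (List Int)) (R C : Int) (S : Finset (Int × Int)) :
    Finset (Int × Int) :=
  haveI : DecidablePred (fun q => ∃ p ∈ S, reach land R C p q) :=
    fun _ => Classical.propDecidable _
  (cellsF land R C).filter (fun q => ∃ p ∈ S, reach land R C p q)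

theorem mem_reachSet {land : List (List Int)} {R C : Int} {S : Finset (Int × Int)}
    {q : Int × Int} :
    q ∈ reachSet land R C S ↔ isCell land R C q = true ∧ ∃ p ∈ S, reach land R C p q := by
  simp [reachSet, Finset.mem_filter, mem_cellsF]

theorem reachSet_subset_cellsF {land : List (List Int)} {R C : Int} {S : Finset (Int × Int)} :
    reachSet land R C S ⊆ cellsF land R C := by
  intro q hq
  exact mem_cellsF.2 (mem_reachSet.1 hq).1

theorem self_mem_reachSet {land : List (List Int)} {R C : Int} {S : Finset (Int × Int)}
    {p : Int × Int} (hp : p ∈ S) (hc : isCell land R C p = true) :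
    p ∈ reachSet land R C S :=
  mem_reachSet.2 ⟨hc, p, hp, Relation.ReflTransGen.refl⟩

theorem reachSet_union (land : List (List Int)) (R C : Int) (S T : Finset (Int × Int)) :
    reachSet land R C (S ∪ T) = reachSet land R C S ∪ reachSet land R C T := by
  ext q
  simp only [mem_reachSet, Finset.mem_union, Finset.mem_union]
  constructor
  · rintro ⟨hc, p, hp | hp, hr⟩
    · exact Or.inl ⟨hc, p, hp, hr⟩
    · exact Or.inr ⟨hc, p, hp, hr⟩
  · rintro (⟨hc, p, hp, hr⟩ | ⟨hc, p, hp, hr⟩)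
    · exact ⟨hc, p, Or.inl hp, hr⟩
    · exact ⟨hc, p, Or.inr hp, hr⟩

theorem mem_reachSet_step {land : List (List Int)} {R C : Int} {S : Finset (Int × Int)}
    {x y : Int × Int} (hx : x ∈ reachSet land R C S) (hxy : adjStep land R C x y) :
    y ∈ reachSet land R C S := by
  obtain ⟨hc, p, hp, hr⟩ := mem_reachSet.1 hx
  exact mem_reachSet.2 ⟨hxy.2.1, p, hp, hr.tail hxy⟩

theorem reachSet_seeds_subset {land : List (List Int)} {R C : Int}
    {S T : Finset (Int × Int)} (h : ∀ s ∈ S, ∃ t ∈ T, reach land R C t s) :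
    reachSet land R C S ⊆ reachSet land R C T := by
  intro q hq
  obtain ⟨hc, p, hp, hr⟩ := mem_reachSet.1 hq
  obtain ⟨t, ht, htp⟩ := h p hp
  exact mem_reachSet.2 ⟨hc, t, ht, htp.trans hr⟩

theorem reachSet_singleton_eq_of_mem {land : List (List Int)} {R C : Int}
    {s x : Int × Int} (h : x ∈ reachSet land R C {s}) :
    reachSet land R C {s} = reachSet land R C {x} := by
  obtain ⟨hc, p, hp, hr⟩ := mem_reachSet.1 h
  replace h : reach land R C s x := by
    obtain ⟨hc, p, hp, hr⟩ := mem_reachSet.1 h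
    simp only [Finset.mem_singleton] at hp
    exact hp ▸ hr
  ext q
  simp only [mem_reachSet, Finset.mem_singleton]
  constructor
  · rintro ⟨hq, p2, rfl, hr2⟩
    exact ⟨hq, x, rfl, (reach_symm h).trans hr2⟩
  · rintro ⟨hq, p2, rfl, hr2⟩
    exact ⟨hq, s, rfl, h.trans hr2⟩

-- a set containing the seeds and closed under adjacency contains the whole reachSet
theorem reachSet_subset_closed {land : List (List Int)} {R C : Int}
    {S : Finset (Int × Int)} {W : Finset (Int × Int)}
    (hS : ∀ p ∈ S, isCell land R C p = true → p ∈ W)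
    (hcl : ∀ x ∈ W, ∀ y, adjStep land R C x y → y ∈ W) :
    reachSet land R C S ⊆ W := by
  intro q hq
  obtain ⟨hc, p, hp, hr⟩ := mem_reachSet.1 hq
  clear hq
  revert hc
  induction hr with
  | refl => intro hc; exact hS p hp hc
  | tail h1 h2 ih => intro _; exact hcl _ (ih h2.1) _ h2
-- the abstract worklist flood fill both loops are simulations of
def floodG (land : List (List Int)) (R C : Int) :
    Nat → List (Int × Int) → Finset (Int × Int) → Nat → Finset (Int × Int) × Nat
  | 0, _, V, n => (V, n)
  | _ + 1, [], V, n => (V, n)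
  | fuel + 1, p :: Q, V, n =>
    let st := (bNbrs p).foldl
      (fun (st : List (Int × Int) × Finset (Int × Int)) q =>
        if isCell land R C q = true ∧ q ∉ st.2 then (st.1 ++ [q], insert q st.2) else st)
      (Q, V)
    floodG land R C fuel st.1 st.2 (n + 1)

-- characterisation of the inner neighbour fold
theorem stepFold_spec (land : List (List Int)) (R C : Int) (L : List (Int × Int)) :
    ∀ (Q : List (Int × Int)) (V : Finset (Int × Int)),
      ∃ D : List (Int × Int),
        (L.foldl (fun (st : List (Int × Int) × Finset (Int × Int)) q =>
          if isCell land R C q = true ∧ q ∉ st.2 then (st.1 ++ [q], insert q st.2) else st)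
          (Q, V)) = (Q ++ D, V ∪ D.toFinset) ∧
        D.Nodup ∧ (∀ d ∈ D, d ∈ L ∧ isCell land R C d = true ∧ d ∉ V) ∧
        (∀ q ∈ L, isCell land R C q = true → q ∈ V ∪ D.toFinset) ∧
        (V ∪ D.toFinset).card = V.card + D.length := by
  induction L with
  | nil =>
    intro Q V
    exact ⟨[], by simp⟩
  | cons q L ih =>
    intro Q V
    by_cases hq : isCell land R C q = true ∧ q ∉ V
    · obtain ⟨D, hst, hnd, hfresh, hmem, hcard⟩ := ih (Q ++ [q]) (insert q V)
      refine ⟨q :: D, ?_, ?_, ?_, ?_, ?_⟩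
      · rw [List.foldl_cons, if_pos hq, hst]
        simp only [Prod.mk.injEq]
        refine ⟨by simp, ?_⟩
        ext z
        simp only [Finset.mem_union, Finset.mem_insert, List.mem_toFinset, List.mem_cons]
        tauto
      · refine List.nodup_cons.2 ⟨fun hqD => ?_, hnd⟩
        exact (hfresh q hqD).2.2 (Finset.mem_insert_self q V)
      · intro d hd
        rcases List.mem_cons.1 hd with rfl | hd
        · exact ⟨List.mem_cons_self .., hq.1, hq.2⟩
        · obtain ⟨h1, h2, h3⟩ := hfresh d hd
          exact ⟨List.mem_cons_of_mem _ h1, h2, fun hdV => h3 (Finset.mem_insert_of_mem hdV)⟩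
      · intro z hz hcz
        rcases List.mem_cons.1 hz with rfl | hz
        · have : z ∈ insert z V ∪ D.toFinset := Finset.mem_union_left _ (Finset.mem_insert_self z V)
          simp only [Finset.mem_union, Finset.mem_insert, List.mem_toFinset, List.mem_cons] at this ⊢
          tauto
        · have := hmem z hz hcz
          simp only [Finset.mem_union, Finset.mem_insert, List.mem_toFinset, List.mem_cons] at this ⊢
          tauto
      · have hins : (insert q V).card = V.card + 1 := Finset.card_insert_of_notMem hq.2
        have : insert q V ∪ D.toFinset = V ∪ (q :: D).toFinset := by
          ext z
          simp only [Finset.mem_union, Finset.mem_insert, List.mem_toFinset, List.mem_cons]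
          tauto
        rw [← this, hcard, hins, List.length_cons]
        omega
    · obtain ⟨D, hst, hnd, hfresh, hmem, hcard⟩ := ih Q V
      refine ⟨D, ?_, hnd, ?_, ?_, hcard⟩
      · rw [List.foldl_cons, if_neg hq]
        exact hst
      · intro d hd
        obtain ⟨h1, h2, h3⟩ := hfresh d hd
        exact ⟨List.mem_cons_of_mem _ h1, h2, h3⟩
      · intro z hz hcz
        rcases List.mem_cons.1 hz with rfl | hz
        · have hzv : z ∈ V := by
            by_contra hzv
            exact hq ⟨hcz, hzv⟩
          exact Finset.mem_union_left _ hzv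
        · exact hmem z hz hcz

-- the master lemma: under the loop invariants the flood fill computes V ∪ reachSet ↑Q
-- (closure, upper bound, monotonicity and the pop count), given enough fuel
theorem floodG_main (land : List (List Int)) (R C : Int) :
    ∀ (fuel : Nat) (Q : List (Int × Int)) (V : Finset (Int × Int)) (n : Nat),
      (∀ p ∈ Q, p ∈ V) →
      V ⊆ cellsF land R C →
      Q.Nodup →
      (∀ x ∈ V, x ∉ Q → ∀ y, adjStep land R C x y → y ∈ V) →
      5 * ((cellsF land R C).card - V.card) + Q.length + 1 ≤ fuel →
      (∀ x ∈ (floodG land R C fuel Q V n).1, ∀ y, adjStep land R C x y →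
          y ∈ (floodG land R C fuel Q V n).1) ∧
      (floodG land R C fuel Q V n).1 ⊆ V ∪ reachSet land R C Q.toFinset ∧
      V ⊆ (floodG land R C fuel Q V n).1 ∧
      (floodG land R C fuel Q V n).2 + V.card = n + Q.length + ((floodG land R C fuel Q V n).1).card := by
  intro fuel
  induction fuel with
  | zero =>
    intro Q V n h1 h2 h3 h4 hf
    omega
  | succ fuel ih =>
    intro Q V n h1 h2 h3 h4 hf
    match Q with
    | [] =>
      refine ⟨?_, ?_, ?_, ?_⟩
      · intro x hx y hxy
        exact h4 x hx (List.not_mem_nil) y hxy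
      · intro x hx
        exact Finset.mem_union_left _ hx
      · exact fun x hx => hx
      · simp [floodG]
    | p :: Qt =>
      obtain ⟨D, hst, hnd, hfresh, hmem, hcard⟩ := stepFold_spec land R C (bNbrs p) Qt V
      have hunf : floodG land R C (fuel + 1) (p :: Qt) V n
          = floodG land R C fuel (Qt ++ D) (V ∪ D.toFinset) (n + 1) := by
        simp only [floodG, hst]
      -- facts about D
      have hpV : p ∈ V := h1 p (List.mem_cons_self ..)
      have hpc : isCell land R C p = true := mem_cellsF.1 (h2 hpV)
      have hDc : ∀ d ∈ D, d ∈ cellsF land R C := fun d hd => mem_cellsF.2 (hfresh d hd).2.1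
      have hDadj : ∀ d ∈ D, adjStep land R C p d :=
        fun d hd => ⟨hpc, (hfresh d hd).2.1, (hfresh d hd).1⟩
      -- invariants for the next state
      have h1' : ∀ q ∈ Qt ++ D, q ∈ V ∪ D.toFinset := by
        intro q hq
        rcases List.mem_append.1 hq with hq | hq
        · exact Finset.mem_union_left _ (h1 q (List.mem_cons_of_mem _ hq))
        · exact Finset.mem_union_right _ (List.mem_toFinset.2 hq)
      have h2' : V ∪ D.toFinset ⊆ cellsF land R C := by
        intro x hx
        rcases Finset.mem_union.1 hx with hx | hx
        · exact h2 hx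
        · exact hDc x (List.mem_toFinset.1 hx)
      have h3' : (Qt ++ D).Nodup := by
        refine List.Nodup.append (List.Nodup.of_cons h3) hnd ?_
        intro x hx hxD
        exact (hfresh x hxD).2.2 (h1 x (List.mem_cons_of_mem _ hx))
      have h4' : ∀ x ∈ V ∪ D.toFinset, x ∉ Qt ++ D →
          ∀ y, adjStep land R C x y → y ∈ V ∪ D.toFinset := by
        intro x hx hnx y hxy
        rcases Finset.mem_union.1 hx with hx | hx
        · by_cases hxp : x = p
          · subst hxp
            exact hmem y hxy.2.2 hxy.2.1
          · have hxQ : x ∉ p :: Qt := by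
              intro hmem2
              rcases List.mem_cons.1 hmem2 with h | h
              · exact hxp h
              · exact hnx (List.mem_append.2 (Or.inl h))
            exact Finset.mem_union_left _ (h4 x hx hxQ y hxy)
        · exact absurd (List.mem_append.2 (Or.inr (List.mem_toFinset.1 hx))) hnx
      have hfuel' : 5 * ((cellsF land R C).card - (V ∪ D.toFinset).card) + (Qt ++ D).length + 1 ≤ fuel := by
        have hVle : (V ∪ D.toFinset).card ≤ (cellsF land R C).card := Finset.card_le_card h2'
        rw [List.length_append]
        simp only [List.length_cons] at hf
        omega
      obtain ⟨c1, c2, c3, c4⟩ := ih (Qt ++ D) (V ∪ D.toFinset) (n + 1) h1' h2' h3' h4' hfuel'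
      rw [hunf]
      refine ⟨c1, ?_, ?_, ?_⟩
      · -- upper bound: V ∪ D ∪ reach (Qt ++ D) ⊆ V ∪ reach (p :: Qt)
        intro x hx
        rcases Finset.mem_union.1 (c2 hx) with hx2 | hx2
        · rcases Finset.mem_union.1 hx2 with hx3 | hx3
          · exact Finset.mem_union_left _ hx3
          · -- x ∈ D: one step from p
            have hd := List.mem_toFinset.1 hx3
            refine Finset.mem_union_right _ (mem_reachSet.2 ⟨(hfresh x hd).2.1, p, ?_, ?_⟩)
            · exact List.mem_toFinset.2 (List.mem_cons_self ..)
            · exact Relation.ReflTransGen.single (hDadj x hd)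
        · -- x reachable from Qt ++ D seeds
          refine Finset.mem_union_right _ ?_
          refine reachSet_seeds_subset ?_ hx2
          intro s hs
          rcases List.mem_append.1 (List.mem_toFinset.1 hs) with hs2 | hs2
          · exact ⟨s, List.mem_toFinset.2 (List.mem_cons_of_mem _ hs2), Relation.ReflTransGen.refl⟩
          · exact ⟨p, List.mem_toFinset.2 (List.mem_cons_self ..),
              Relation.ReflTransGen.single (hDadj s hs2)⟩
      · intro x hx
        exact c3 (Finset.mem_union_left _ hx)
      · have hVD : (V ∪ D.toFinset).card = V.card + D.length := hcard
        have hmono : V ∪ D.toFinset ⊆ (floodG land R C fuel (Qt ++ D) (V ∪ D.toFinset) (n + 1)).1 := c3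
        simp only [List.length_append, List.length_cons] at c4 ⊢
        omega

theorem floodG_result (land : List (List Int)) (R C : Int)
    (fuel : Nat) (Q : List (Int × Int)) (V : Finset (Int × Int)) (n : Nat)
    (h1 : ∀ p ∈ Q, p ∈ V)
    (h2 : V ⊆ cellsF land R C)
    (h3 : Q.Nodup)
    (h4 : ∀ x ∈ V, x ∉ Q → ∀ y, adjStep land R C x y → y ∈ V)
    (hf : 5 * ((cellsF land R C).card - V.card) + Q.length + 1 ≤ fuel) :
    (floodG land R C fuel Q V n).1 = V ∪ reachSet land R C Q.toFinset ∧
    (floodG land R C fuel Q V n).2 + V.card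
      = n + Q.length + (V ∪ reachSet land R C Q.toFinset).card := by
  obtain ⟨c1, c2, c3, c4⟩ := floodG_main land R C fuel Q V n h1 h2 h3 h4 hf
  have heq : (floodG land R C fuel Q V n).1 = V ∪ reachSet land R C Q.toFinset := by
    apply Finset.Subset.antisymm c2
    intro x hx
    rcases Finset.mem_union.1 hx with hx | hx
    · exact c3 hx
    · refine reachSet_subset_closed ?_ c1 hx
      intro q hq _
      exact c3 (h1 q (List.mem_toFinset.1 hq))
  exact ⟨heq, by rw [← heq]; exact c4⟩
theorem isCell_iff {land : List (List Int)} {R C : Int} {p : Int × Int} :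
    isCell land R C p = true ↔
      0 ≤ p.1 ∧ p.1 < R ∧ 0 ≤ p.2 ∧ p.2 < C ∧ aGet land p.1 p.2 ≠ 0 := by
  simp [isCell, and_assoc]

-- A's visit matrix represents a ghost Finset
def MatRepr (R C : Int) (visit : List (List Int)) (V : Finset (Int × Int)) : Prop :=
  visit.length = R.toNat ∧ (∀ row ∈ visit, row.length = C.toNat) ∧
  (∀ p ∈ V, 0 ≤ p.1 ∧ p.1 < R ∧ 0 ≤ p.2 ∧ p.2 < C) ∧
  (∀ r c : Int, 0 ≤ r → r < R → 0 ≤ c → c < C →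
    (aGet visit r c ≠ 0 ↔ (r, c) ∈ V))

theorem getD_zero_of_all_zero {l : List Int} (h : ∀ x ∈ l, x = 0) (n : Nat) :
    l.getD n 0 = 0 := by
  rw [List.getD_eq_getElem?_getD]
  cases hx : l[n]? with
  | none => rfl
  | some x => exact h x (List.mem_of_getElem? hx)

theorem aGet_aSet {R C : Int} (visit : List (List Int))
    (hlen : visit.length = R.toNat) (hrows : ∀ row ∈ visit, row.length = C.toNat)
    {r c r' c' : Int} (hr0 : 0 ≤ r) (hr1 : r < R) (hc0 : 0 ≤ c) (hc1 : c < C)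
    (hr0' : 0 ≤ r') (hc0' : 0 ≤ c') :
    aGet (aSet visit r c) r' c' = if r' = r ∧ c' = c then 1 else aGet visit r' c' := by
  have hrn : r.toNat < visit.length := by omega
  have hrowlen : (PySem.List.pyGetD visit r []).length = C.toNat := by
    rw [PySem.List.pyGetD_of_nonneg _ _ hr0, List.getD_eq_getElem visit [] hrn]
    exact hrows _ (List.getElem_mem hrn)
  have hcn : c.toNat < (PySem.List.pyGetD visit r []).length := by omega
  have eA : aGet (aSet visit r c) r' c'
      = ((visit.set r.toNat ((PySem.List.pyGetD visit r []).set c.toNat 1)).getD r'.toNat []).getD c'.toNat 0 := by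
    rw [aGet, aSet, PySem.List.pySetD_of_nonneg _ _ hr0, PySem.List.pySetD_of_nonneg _ _ hc0,
      PySem.List.pyGetD_of_nonneg _ _ hr0', PySem.List.pyGetD_of_nonneg _ _ hc0']
  have eB : aGet visit r' c' = (visit.getD r'.toNat []).getD c'.toNat 0 := by
    rw [aGet, PySem.List.pyGetD_of_nonneg _ _ hr0', PySem.List.pyGetD_of_nonneg _ _ hc0']
  rw [eA, eB]
  by_cases hrr : r'.toNat = r.toNat
  · have hset : (visit.set r.toNat ((PySem.List.pyGetD visit r []).set c.toNat 1)).getD r'.toNat []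
        = (PySem.List.pyGetD visit r []).set c.toNat 1 := by
      rw [List.getD_eq_getElem?_getD, hrr, List.getElem?_set_self hrn]
      rfl
    rw [hset]
    have hrowD : visit.getD r'.toNat [] = PySem.List.pyGetD visit r [] := by
      rw [hrr, PySem.List.pyGetD_of_nonneg _ _ hr0]
    rw [hrowD]
    by_cases hcc : c'.toNat = c.toNat
    · rw [List.getD_eq_getElem?_getD, hcc, List.getElem?_set_self hcn]
      rw [if_pos (by omega)]
      rfl
    · rw [List.getD_eq_getElem?_getD, List.getElem?_set_ne (fun h => hcc h.symm),
        if_neg (by omega), List.getD_eq_getElem?_getD]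
  · have hset : (visit.set r.toNat ((PySem.List.pyGetD visit r []).set c.toNat 1)).getD r'.toNat []
        = visit.getD r'.toNat [] := by
      rw [List.getD_eq_getElem?_getD, List.getElem?_set_ne (fun h => hrr h.symm),
        List.getD_eq_getElem?_getD]
    rw [hset, if_neg (by omega)]

theorem MatRepr_set {land : List (List Int)} {R C : Int} {visit : List (List Int)}
    {V : Finset (Int × Int)} (h : MatRepr R C visit V) {q : Int × Int}
    (hq : isCell land R C q = true) :
    MatRepr R C (aSet visit q.1 q.2) (insert q V) := by
  obtain ⟨hlen, hrows, hbnd, hent⟩ := h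
  obtain ⟨h1, h2, h3, h4, _⟩ := isCell_iff.1 hq
  have hrn : q.1.toNat < visit.length := by omega
  have hrowlen : (PySem.List.pyGetD visit q.1 []).length = C.toNat := by
    rw [PySem.List.pyGetD_of_nonneg _ _ h1, List.getD_eq_getElem visit [] hrn]
    exact hrows _ (List.getElem_mem hrn)
  refine ⟨?_, ?_, ?_, ?_⟩
  · rw [aSet, PySem.List.length_pySetD, hlen]
  · intro row hrow
    rw [aSet, PySem.List.pySetD_of_nonneg _ _ h1] at hrow
    rcases List.mem_or_eq_of_mem_set hrow with hr | hr
    · exact hrows row hr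
    · rw [hr, PySem.List.pySetD_of_nonneg _ _ h3, List.length_set]
      exact hrowlen
  · intro p hp
    rcases Finset.mem_insert.1 hp with rfl | hp
    · exact ⟨h1, h2, h3, h4⟩
    · exact hbnd p hp
  · intro r c hr0 hr1 hc0 hc1
    rw [aGet_aSet visit hlen hrows h1 h2 h3 h4 hr0 hc0]
    by_cases he : r = q.1 ∧ c = q.2
    · rw [if_pos he]
      simp only [ne_eq, one_ne_zero, not_false_eq_true, true_iff]
      have heq : ((r, c) : Int × Int) = q := by
        obtain ⟨a, b⟩ := q
        exact Prod.ext he.1 he.2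
      rw [heq]
      exact Finset.mem_insert_self q V
    · rw [if_neg he, hent r c hr0 hr1 hc0 hc1]
      have hne : ((r, c) : Int × Int) ≠ q := by
        intro heq
        exact he ⟨congrArg Prod.fst heq, congrArg Prod.snd heq⟩
      rw [Finset.mem_insert]
      constructor
      · exact Or.inr
      · rintro (hh | hh)
        · exact absurd hh hne
        · exact hh

-- A's neighbour update, as a function of the neighbour cell
def stepA (land : List (List Int)) (R C : Int)
    (st : List (Int × Int) × List (List Int)) (q : Int × Int) :
    List (Int × Int) × List (List Int) :=
  if q.1 < 0 ∨ R ≤ q.1 ∨ q.2 < 0 ∨ C ≤ q.2 then st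
  else if aGet land q.1 q.2 ≠ 0 ∧ aGet st.2 q.1 q.2 = 0 then
    (st.1 ++ [q], aSet st.2 q.1 q.2)
  else st

theorem stepA_stepG (land : List (List Int)) (R C : Int)
    {visit : List (List Int)} {V : Finset (Int × Int)} (Q : List (Int × Int))
    (h : MatRepr R C visit V) (q : Int × Int) :
    (stepA land R C (Q, visit) q).1
      = ((if isCell land R C q = true ∧ q ∉ V then (Q ++ [q], insert q V) else (Q, V)) : List (Int × Int) × Finset (Int × Int)).1 ∧
    MatRepr R C (stepA land R C (Q, visit) q).2
      ((if isCell land R C q = true ∧ q ∉ V then (Q ++ [q], insert q V) else (Q, V)) : List (Int × Int) × Finset (Int × Int)).2 := by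
  by_cases hb : q.1 < 0 ∨ R ≤ q.1 ∨ q.2 < 0 ∨ C ≤ q.2
  · have hnc : ¬ (isCell land R C q = true ∧ q ∉ V) := by
      rintro ⟨hc, -⟩
      obtain ⟨a1, a2, a3, a4, -⟩ := isCell_iff.1 hc
      omega
    rw [stepA, if_pos hb, if_neg hnc]
    exact ⟨rfl, h⟩
  · rw [not_or, not_or, not_or] at hb
    obtain ⟨b1, b2, b3, b4⟩ := hb
    rw [not_lt] at b1 b3
    rw [not_le] at b2 b4
    have hent : aGet visit q.1 q.2 ≠ 0 ↔ q ∈ V := by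
      have := h.2.2.2 q.1 q.2 b1 b2 b3 b4
      simpa using this
    by_cases hA : aGet land q.1 q.2 ≠ 0 ∧ aGet visit q.1 q.2 = 0
    · have hic : isCell land R C q = true := isCell_iff.2 ⟨b1, b2, b3, b4, hA.1⟩
      have hnv : q ∉ V := fun hv => (hA.2 ▸ hent.2 hv) rfl
      rw [stepA, if_neg (by omega), if_pos hA, if_pos ⟨hic, hnv⟩]
      exact ⟨rfl, MatRepr_set ⟨h.1, h.2.1, h.2.2.1, h.2.2.2⟩ hic⟩
    · have hnc : ¬ (isCell land R C q = true ∧ q ∉ V) := by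
        rintro ⟨hc, hnv⟩
        obtain ⟨-, -, -, -, hl⟩ := isCell_iff.1 hc
        have : aGet visit q.1 q.2 = 0 := by
          by_contra hne
          exact hnv (hent.1 hne)
        exact hA ⟨hl, this⟩
      rw [stepA, if_neg (by omega), if_neg hA, if_neg hnc]
      exact ⟨rfl, h⟩

theorem foldA_foldG (land : List (List Int)) (R C : Int) (L : List (Int × Int)) :
    ∀ (Q : List (Int × Int)) (visit : List (List Int)) (V : Finset (Int × Int)),
      MatRepr R C visit V →
      (L.foldl (stepA land R C) (Q, visit)).1
        = (L.foldl (fun (st : List (Int × Int) × Finset (Int × Int)) q =>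
            if isCell land R C q = true ∧ q ∉ st.2 then (st.1 ++ [q], insert q st.2) else st)
            (Q, V)).1 ∧
      MatRepr R C (L.foldl (stepA land R C) (Q, visit)).2
        ((L.foldl (fun (st : List (Int × Int) × Finset (Int × Int)) q =>
            if isCell land R C q = true ∧ q ∉ st.2 then (st.1 ++ [q], insert q st.2) else st)
            (Q, V)).2) := by
  induction L with
  | nil => intro Q visit V h; exact ⟨rfl, h⟩
  | cons q L ih =>
    intro Q visit V h
    obtain ⟨e1, e2⟩ := stepA_stepG land R C Q h q
    rw [List.foldl_cons, List.foldl_cons]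
    by_cases hc : isCell land R C q = true ∧ q ∉ V
    · rw [if_pos hc] at e1 e2 ⊢
      have hA : stepA land R C (Q, visit) q = (Q ++ [q], (stepA land R C (Q, visit) q).2) := by
        rw [Prod.ext_iff]
        exact ⟨e1, rfl⟩
      rw [hA]
      exact ih (Q ++ [q]) _ _ e2
    · rw [if_neg hc] at e1 e2 ⊢
      have hA : stepA land R C (Q, visit) q = (Q, (stepA land R C (Q, visit) q).2) := by
        rw [Prod.ext_iff]
        exact ⟨e1, rfl⟩
      rw [hA]
      exact ih Q _ _ e2
theorem nbrs_eq (cr cc : Int) :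
    (PySem.List.pyRange 0 4 1).map
      (fun d => (cr + PySem.List.pyGetD dr d 0, cc + PySem.List.pyGetD dc d 0))
      = bNbrs (cr, cc) := by
  have hr : PySem.List.pyRange 0 4 1 = [0, 1, 2, 3] := by decide
  have h1 : PySem.List.pyGetD dr 0 0 = 1 := by decide
  have h2 : PySem.List.pyGetD dr 1 0 = -1 := by decide
  have h3 : PySem.List.pyGetD dr 2 0 = 0 := by decide
  have h4 : PySem.List.pyGetD dr 3 0 = 0 := by decide
  have h5 : PySem.List.pyGetD dc 0 0 = 0 := by decide
  have h6 : PySem.List.pyGetD dc 1 0 = 0 := by decide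
  have h7 : PySem.List.pyGetD dc 2 0 = 1 := by decide
  have h8 : PySem.List.pyGetD dc 3 0 = -1 := by decide
  rw [hr]
  simp only [List.map_cons, List.map_nil, h1, h2, h3, h4, h5, h6, h7, h8, bNbrs]
  norm_num [sub_eq_add_neg]

theorem aLoop_step (land : List (List Int)) (R C : Int) (fuel : Nat) (cr cc : Int)
    (Qt : List (Int × Int)) (visit : List (List Int)) (oil : Int) :
    aLoop land R C (fuel + 1) ((cr, cc) :: Qt) visit oil =
      aLoop land R C fuel
        ((bNbrs (cr, cc)).foldl (stepA land R C) (Qt, visit)).1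
        ((bNbrs (cr, cc)).foldl (stepA land R C) (Qt, visit)).2
        (if aGet land cr cc ≠ 0 then oil + 1 else oil) := by
  rw [aLoop]
  have hfun : (fun (st : List (Int × Int) × List (List Int)) (d : Int) =>
      let nr := cr + PySem.List.pyGetD dr d 0
      let nc := cc + PySem.List.pyGetD dc d 0
      if nr < 0 ∨ R ≤ nr ∨ nc < 0 ∨ C ≤ nc then st
      else if aGet land nr nc ≠ 0 ∧ aGet st.2 nr nc = 0 then
        (st.1 ++ [(nr, nc)], aSet st.2 nr nc)
      else st)
      = fun (st : List (Int × Int) × List (List Int)) (d : Int) =>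
          stepA land R C st (cr + PySem.List.pyGetD dr d 0, cc + PySem.List.pyGetD dc d 0) := rfl
  rw [hfun, ← nbrs_eq cr cc, List.foldl_map]

theorem floodG_step (land : List (List Int)) (R C : Int) (fuel : Nat) (p : Int × Int)
    (Qt : List (Int × Int)) (V : Finset (Int × Int)) (n : Nat) :
    floodG land R C (fuel + 1) (p :: Qt) V n =
      floodG land R C fuel
        ((bNbrs p).foldl (fun (st : List (Int × Int) × Finset (Int × Int)) q =>
          if isCell land R C q = true ∧ q ∉ st.2 then (st.1 ++ [q], insert q st.2) else st)
          (Qt, V)).1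
        ((bNbrs p).foldl (fun (st : List (Int × Int) × Finset (Int × Int)) q =>
          if isCell land R C q = true ∧ q ∉ st.2 then (st.1 ++ [q], insert q st.2) else st)
          (Qt, V)).2
        (n + 1) := by
  rw [floodG]

theorem aLoop_sim (land : List (List Int)) (R C : Int) :
    ∀ (fuel : Nat) (Q : List (Int × Int)) (visit : List (List Int))
      (V : Finset (Int × Int)) (oil : Int) (n : Nat),
      MatRepr R C visit V →
      (∀ p ∈ Q, p ∈ cellsF land R C) →
      aLoop land R C fuel Q visit oil
        = oil + ((floodG land R C fuel Q V n).2 : Int) - (n : Int) := by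
  intro fuel
  induction fuel with
  | zero =>
    intro Q visit V oil n _ _
    simp [aLoop, floodG]
  | succ fuel ih =>
    intro Q visit V oil n hrep hQ
    match Q with
    | [] => simp [aLoop, floodG]
    | (cr, cc) :: Qt =>
      have hcell : ((cr, cc) : Int × Int) ∈ cellsF land R C := hQ _ (List.mem_cons_self ..)
      have hland : aGet land cr cc ≠ 0 := (isCell_iff.1 (mem_cellsF.1 hcell)).2.2.2.2
      rw [aLoop_step, floodG_step, if_pos hland]
      obtain ⟨e1, e2⟩ := foldA_foldG land R C (bNbrs (cr, cc)) Qt visit V hrep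
      obtain ⟨D, hst, hnd, hfresh, hmem, hcard⟩ := stepFold_spec land R C (bNbrs (cr, cc)) Qt V
      have hQ' : ∀ p ∈ ((bNbrs (cr, cc)).foldl (fun (st : List (Int × Int) × Finset (Int × Int)) q =>
          if isCell land R C q = true ∧ q ∉ st.2 then (st.1 ++ [q], insert q st.2) else st)
          (Qt, V)).1, p ∈ cellsF land R C := by
        rw [hst]
        intro p hp
        rcases List.mem_append.1 hp with hp | hp
        · exact hQ p (List.mem_cons_of_mem _ hp)
        · exact mem_cellsF.2 (hfresh p hp).2.1
      have hfst : ((bNbrs (cr, cc)).foldl (stepA land R C) (Qt, visit)).1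
          = ((bNbrs (cr, cc)).foldl (fun (st : List (Int × Int) × Finset (Int × Int)) q =>
            if isCell land R C q = true ∧ q ∉ st.2 then (st.1 ++ [q], insert q st.2) else st)
            (Qt, V)).1 := e1
      rw [show ((bNbrs (cr, cc)).foldl (stepA land R C) (Qt, visit))
          = (((bNbrs (cr, cc)).foldl (stepA land R C) (Qt, visit)).1,
             ((bNbrs (cr, cc)).foldl (stepA land R C) (Qt, visit)).2) from rfl] at *
      rw [hfst]
      rw [ih _ _ _ (oil + 1) (n + 1) e2 hQ']
      push_cast
      ring
noncomputable def colSeeds (land : List (List Int)) (R C pos : Int) : Finset (Int × Int) :=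
  (cellsF land R C).filter (fun p => p.2 = pos)

theorem seedFold (land : List (List Int)) (R C pos : Int) (hp0 : 0 ≤ pos) (hp1 : pos < C) :
    ∀ (rs : List Int), rs.Nodup → (∀ r ∈ rs, 0 ≤ r ∧ r < R) →
    ∀ (visit : List (List Int)) (Q : List (Int × Int)),
      MatRepr R C visit Q.toFinset → Q.Nodup →
      (∀ p ∈ Q, p ∈ cellsF land R C) →
      (∀ r ∈ rs, ((r, pos) : Int × Int) ∉ Q) →
      MatRepr R C (rs.foldl (fun (st : List (List Int) × List (Int × Int)) r =>
          if aGet land r pos ≠ 0 then (aSet st.1 r pos, st.2 ++ [(r, pos)]) else st)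
          (visit, Q)).1
        ((rs.foldl (fun (st : List (List Int) × List (Int × Int)) r =>
          if aGet land r pos ≠ 0 then (aSet st.1 r pos, st.2 ++ [(r, pos)]) else st)
          (visit, Q)).2).toFinset ∧
      (rs.foldl (fun (st : List (List Int) × List (Int × Int)) r =>
          if aGet land r pos ≠ 0 then (aSet st.1 r pos, st.2 ++ [(r, pos)]) else st)
          (visit, Q)).2
        = Q ++ (rs.filter (fun r => isCell land R C (r, pos))).map (fun r => ((r, pos) : Int × Int)) ∧
      ((rs.foldl (fun (st : List (List Int) × List (Int × Int)) r =>
          if aGet land r pos ≠ 0 then (aSet st.1 r pos, st.2 ++ [(r, pos)]) else st)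
          (visit, Q)).2).Nodup ∧
      (∀ p ∈ (rs.foldl (fun (st : List (List Int) × List (Int × Int)) r =>
          if aGet land r pos ≠ 0 then (aSet st.1 r pos, st.2 ++ [(r, pos)]) else st)
          (visit, Q)).2, p ∈ cellsF land R C) := by
  intro rs
  induction rs with
  | nil =>
    intro _ _ visit Q hrep hnd hcells _
    exact ⟨hrep, by simp, hnd, hcells⟩
  | cons r rs ih =>
    intro hndr hbnd visit Q hrep hnd hcells hfresh
    have hb := hbnd r (List.mem_cons_self ..)
    rw [List.foldl_cons]
    by_cases hl : aGet land r pos ≠ 0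
    · have hic : isCell land R C ((r, pos) : Int × Int) = true :=
        isCell_iff.2 ⟨hb.1, hb.2, hp0, hp1, hl⟩
      rw [if_pos hl]
      have hTF : (Q ++ [((r, pos) : Int × Int)]).toFinset
          = insert ((r, pos) : Int × Int) Q.toFinset := by
        rw [List.toFinset_append]
        simp
      have hrep' : MatRepr R C (aSet visit r pos) (Q ++ [((r, pos) : Int × Int)]).toFinset := by
        rw [hTF]
        exact MatRepr_set (land := land) hrep hic
      have hnd' : (Q ++ [((r, pos) : Int × Int)]).Nodup := by
        rw [List.nodup_append]
        refine ⟨hnd, List.nodup_singleton _, ?_⟩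
        intro a ha b hb
        rw [List.mem_singleton] at hb
        intro he
        rw [hb] at he
        rw [he] at ha
        exact hfresh r (List.mem_cons_self ..) ha
      have hcells' : ∀ p ∈ Q ++ [((r, pos) : Int × Int)], p ∈ cellsF land R C := by
        intro p hp
        rcases List.mem_append.1 hp with hp | hp
        · exact hcells p hp
        · rw [List.mem_singleton.1 hp]
          exact mem_cellsF.2 hic
      have hfresh' : ∀ r' ∈ rs, ((r', pos) : Int × Int) ∉ Q ++ [((r, pos) : Int × Int)] := by
        intro r' hr' hmem
        rcases List.mem_append.1 hmem with hm | hm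
        · exact hfresh r' (List.mem_cons_of_mem _ hr') hm
        · have : r' = r := congrArg Prod.fst (List.mem_singleton.1 hm)
          exact (List.nodup_cons.1 hndr).1 (this ▸ hr')
      obtain ⟨c1, c2, c3, c4⟩ := ih (List.nodup_cons.1 hndr).2
        (fun x hx => hbnd x (List.mem_cons_of_mem _ hx)) (aSet visit r pos)
        (Q ++ [((r, pos) : Int × Int)]) hrep' hnd' hcells' hfresh'
      refine ⟨c1, ?_, c3, c4⟩
      rw [c2, List.filter_cons, if_pos hic]
      simp
    · rw [if_neg hl]
      have hic : isCell land R C ((r, pos) : Int × Int) = false := by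
        rw [Bool.eq_false_iff]
        intro hc
        exact hl (isCell_iff.1 hc).2.2.2.2
      obtain ⟨c1, c2, c3, c4⟩ := ih (List.nodup_cons.1 hndr).2
        (fun x hx => hbnd x (List.mem_cons_of_mem _ hx)) visit Q hrep hnd hcells
        (fun r' hr' => hfresh r' (List.mem_cons_of_mem _ hr'))
      refine ⟨c1, ?_, c3, c4⟩
      rw [c2, List.filter_cons, if_neg (by simp [hic])]

theorem visit0_repr (_land : List (List Int)) (R C : Int) :
    MatRepr R C ((PySem.List.pyRange 0 R 1).map
      (fun _ => (PySem.List.pyRange 0 C 1).map (fun _ => (0 : Int))))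
      (([] : List (Int × Int)).toFinset) := by
  refine ⟨?_, ?_, ?_, ?_⟩
  · rw [List.length_map, PySem.List.length_pyRange_one]
    congr 1
    omega
  · intro row hrow
    obtain ⟨r, -, hr⟩ := List.mem_map.1 hrow
    rw [← hr, List.length_map, PySem.List.length_pyRange_one]
    congr 1
    omega
  · intro p hp
    simp at hp
  · intro r c hr0 hr1 hc0 hc1
    simp only [List.toFinset_nil, Finset.notMem_empty, iff_false, ne_eq, not_not]
    rw [aGet, PySem.List.pyGetD_of_nonneg _ _ hr0, PySem.List.pyGetD_of_nonneg _ _ hc0]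
    apply getD_zero_of_all_zero
    intro x hx
    rw [List.getD_eq_getElem?_getD] at hx
    cases hm : ((PySem.List.pyRange 0 R 1).map
        (fun _ => (PySem.List.pyRange 0 C 1).map (fun _ => (0 : Int))))[r.toNat]? with
    | none =>
      rw [hm] at hx
      simp at hx
    | some row =>
      rw [hm] at hx
      simp only [Option.getD_some] at hx
      obtain ⟨-, -, hr⟩ := List.mem_map.1 (List.mem_of_getElem? hm)
      rw [← hr] at hx
      obtain ⟨-, -, hy⟩ := List.mem_map.1 hx
      exact hy.symm

theorem colSeedsList_toFinset (land : List (List Int)) (R C pos : Int) :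
    (((PySem.List.pyRange 0 R 1).filter (fun r => isCell land R C (r, pos))).map
      (fun r => ((r, pos) : Int × Int))).toFinset = colSeeds land R C pos := by
  ext p
  obtain ⟨a, b⟩ := p
  simp only [List.mem_toFinset, List.mem_map, List.mem_filter, PySem.List.mem_pyRange_one,
    colSeeds, Finset.mem_filter, mem_cellsF, Prod.mk.injEq]
  constructor
  · rintro ⟨r, ⟨⟨hr0, hr1⟩, hic⟩, rfl, rfl⟩
    exact ⟨hic, rfl⟩
  · rintro ⟨hic, rfl⟩
    obtain ⟨h1, h2, -⟩ := isCell_iff.1 hic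
    exact ⟨a, ⟨⟨h1, h2⟩, hic⟩, rfl, rfl⟩

theorem aBfs_eq (land : List (List Int)) (R C pos : Int) (hp0 : 0 ≤ pos) (hp1 : pos < C) :
    aBfs land pos R C = ((reachSet land R C (colSeeds land R C pos)).card : Int) := by
  obtain ⟨c1, c2, c3, c4⟩ := seedFold land R C pos hp0 hp1 (PySem.List.pyRange 0 R 1)
    (PySem.List.nodup_pyRange_one 0 R)
    (fun r hr => PySem.List.mem_pyRange_one.1 hr)
    ((PySem.List.pyRange 0 R 1).map (fun _ => (PySem.List.pyRange 0 C 1).map (fun _ => (0 : Int))))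
    [] (visit0_repr land R C) (List.nodup_nil) (by simp) (by simp)
  rw [aBfs]
  set st := (PySem.List.pyRange 0 R 1).foldl (fun (st : List (List Int) × List (Int × Int)) r =>
      if aGet land r pos ≠ 0 then (aSet st.1 r pos, st.2 ++ [(r, pos)]) else st)
      (((PySem.List.pyRange 0 R 1).map (fun _ => (PySem.List.pyRange 0 C 1).map (fun _ => (0 : Int)))), ([] : List (Int × Int))) with hst
  have hTF : (st.2).toFinset = colSeeds land R C pos := by
    rw [c2, List.nil_append, colSeedsList_toFinset]
  have hcard : (st.2).toFinset.card = (st.2).length := List.toFinset_card_of_nodup c3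
  have hsub : (st.2).toFinset ⊆ cellsF land R C := by
    intro p hp
    exact c4 p (List.mem_toFinset.1 hp)
  have hfuel : 5 * ((cellsF land R C).card - (st.2).toFinset.card) + (st.2).length + 1
      ≤ 5 * R.toNat * C.toNat + R.toNat + 1 := by
    have h1 := card_cellsF_le land R C
    have h2 : (st.2).toFinset.card ≤ (cellsF land R C).card := Finset.card_le_card hsub
    have h3 : 5 * R.toNat * C.toNat = 5 * (R.toNat * C.toNat) := by ring
    omega
  obtain ⟨hW, hm⟩ := floodG_result land R C (5 * R.toNat * C.toNat + R.toNat + 1) st.2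
    (st.2).toFinset 0 (fun p hp => List.mem_toFinset.2 hp) hsub c3
    (fun x hx hnx => absurd (List.mem_toFinset.1 hx) hnx) hfuel
  have hsim := aLoop_sim land R C (5 * R.toNat * C.toNat + R.toNat + 1) st.2 st.1
    (st.2).toFinset 0 0 c1 c4
  rw [hsim]
  have hVsub : (st.2).toFinset ⊆ reachSet land R C ((st.2).toFinset) := by
    intro p hp
    exact self_mem_reachSet hp (mem_cellsF.1 (hsub hp))
  have hWeq : (st.2).toFinset ∪ reachSet land R C ((st.2).toFinset)
      = reachSet land R C (colSeeds land R C pos) := by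
    rw [Finset.union_eq_right.2 hVsub, hTF]
  rw [hWeq] at hW hm
  omega
theorem floodG_mono (land : List (List Int)) (R C : Int) :
    ∀ (fuel : Nat) (Q : List (Int × Int)) (V : Finset (Int × Int)) (n : Nat),
      V ⊆ (floodG land R C fuel Q V n).1 := by
  intro fuel
  induction fuel with
  | zero => intro Q V n; exact fun x hx => hx
  | succ fuel ih =>
    intro Q V n
    match Q with
    | [] => exact fun x hx => hx
    | p :: Qt =>
      obtain ⟨D, hst, -, -, -, -⟩ := stepFold_spec land R C (bNbrs p) Qt V
      rw [floodG_step, show ((bNbrs p).foldl (fun (st : List (Int × Int) × Finset (Int × Int)) q =>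
          if isCell land R C q = true ∧ q ∉ st.2 then (st.1 ++ [q], insert q st.2) else st)
          (Qt, V)) = (Qt ++ D, V ∪ D.toFinset) from hst]
      intro x hx
      exact ih _ _ _ (Finset.mem_union_left _ hx)

theorem foldB_foldG (land : List (List Int)) (R C lbl : Int) (L : List (Int × Int)) :
    ∀ (Q : List (Int × Int)) (comp : PySem.Dict (Int × Int) Int),
      comp.keys.Nodup →
      (L.foldl (fun (st : List (Int × Int) × PySem.Dict (Int × Int) Int) n =>
        if 0 ≤ n.1 ∧ n.1 < R ∧ 0 ≤ n.2 ∧ n.2 < C ∧ bGet land n.1 n.2 ≠ 0 ∧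
            st.2.contains n = false then
          (st.1 ++ [n], st.2.insert n lbl)
        else st) (Q, comp)).1
        = (L.foldl (fun (st : List (Int × Int) × Finset (Int × Int)) q =>
            if isCell land R C q = true ∧ q ∉ st.2 then (st.1 ++ [q], insert q st.2) else st)
            (Q, comp.keys.toFinset)).1 ∧
      ((L.foldl (fun (st : List (Int × Int) × PySem.Dict (Int × Int) Int) n =>
        if 0 ≤ n.1 ∧ n.1 < R ∧ 0 ≤ n.2 ∧ n.2 < C ∧ bGet land n.1 n.2 ≠ 0 ∧
            st.2.contains n = false then
          (st.1 ++ [n], st.2.insert n lbl)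
        else st) (Q, comp)).2).keys.toFinset
        = (L.foldl (fun (st : List (Int × Int) × Finset (Int × Int)) q =>
            if isCell land R C q = true ∧ q ∉ st.2 then (st.1 ++ [q], insert q st.2) else st)
            (Q, comp.keys.toFinset)).2 ∧
      ((L.foldl (fun (st : List (Int × Int) × PySem.Dict (Int × Int) Int) n =>
        if 0 ≤ n.1 ∧ n.1 < R ∧ 0 ≤ n.2 ∧ n.2 < C ∧ bGet land n.1 n.2 ≠ 0 ∧
            st.2.contains n = false then
          (st.1 ++ [n], st.2.insert n lbl)
        else st) (Q, comp)).2).keys.Nodup ∧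
      (∀ x, ((L.foldl (fun (st : List (Int × Int) × PySem.Dict (Int × Int) Int) n =>
        if 0 ≤ n.1 ∧ n.1 < R ∧ 0 ≤ n.2 ∧ n.2 < C ∧ bGet land n.1 n.2 ≠ 0 ∧
            st.2.contains n = false then
          (st.1 ++ [n], st.2.insert n lbl)
        else st) (Q, comp)).2).get? x
        = if x ∈ (L.foldl (fun (st : List (Int × Int) × Finset (Int × Int)) q =>
            if isCell land R C q = true ∧ q ∉ st.2 then (st.1 ++ [q], insert q st.2) else st)
            (Q, comp.keys.toFinset)).2 ∧ x ∉ comp.keys.toFinset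
          then some lbl else comp.get? x) := by
  induction L with
  | nil =>
    intro Q comp hnd
    refine ⟨rfl, rfl, hnd, ?_⟩
    intro x
    rw [if_neg (fun h => h.2 h.1)]
    rfl
  | cons q L ih =>
    intro Q comp hnd
    rw [List.foldl_cons, List.foldl_cons]
    have hcond : (0 ≤ q.1 ∧ q.1 < R ∧ 0 ≤ q.2 ∧ q.2 < C ∧ bGet land q.1 q.2 ≠ 0 ∧
        comp.contains q = false)
        ↔ (isCell land R C q = true ∧ q ∉ comp.keys.toFinset) := by
      rw [isCell_iff]
      constructor
      · rintro ⟨a1, a2, a3, a4, a5, a6⟩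
        refine ⟨⟨a1, a2, a3, a4, a5⟩, ?_⟩
        rw [List.mem_toFinset]
        intro hk
        rw [(PySem.Dict.contains_iff_mem_keys comp q).2 hk] at a6
        exact absurd a6 (by simp)
      · rintro ⟨⟨a1, a2, a3, a4, a5⟩, hk⟩
        refine ⟨a1, a2, a3, a4, a5, ?_⟩
        rw [List.mem_toFinset] at hk
        cases hc : comp.contains q with
        | false => rfl
        | true => exact absurd ((PySem.Dict.contains_iff_mem_keys comp q).1 hc) hk
    by_cases hc : isCell land R C q = true ∧ q ∉ comp.keys.toFinset
    · rw [if_pos (hcond.2 hc), if_pos hc]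
      have hcf : comp.contains q = false := (hcond.2 hc).2.2.2.2.2
      have hkeys : (comp.insert q lbl).keys.toFinset = insert q comp.keys.toFinset := by
        rw [PySem.Dict.keys_insert_of_not_contains comp lbl hcf, List.toFinset_append]
        simp [Finset.union_comm]
      have hnd' : (comp.insert q lbl).keys.Nodup := PySem.Dict.nodup_keys_insert comp q lbl hnd
      obtain ⟨c1, c2, c3, c4⟩ := ih (Q ++ [q]) (comp.insert q lbl) hnd'
      rw [hkeys] at c1 c2 c4
      obtain ⟨D, hstG, -, -, -, -⟩ := stepFold_spec land R C L (Q ++ [q]) (insert q comp.keys.toFinset)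
      have hGmem : insert q comp.keys.toFinset ⊆
          (L.foldl (fun (st : List (Int × Int) × Finset (Int × Int)) q =>
            if isCell land R C q = true ∧ q ∉ st.2 then (st.1 ++ [q], insert q st.2) else st)
            (Q ++ [q], insert q comp.keys.toFinset)).2 := by
        rw [hstG]
        exact fun x hx => Finset.mem_union_left _ hx
      refine ⟨c1, c2, c3, ?_⟩
      intro x
      rw [c4 x]
      by_cases hxq : x = q
      · subst hxq
        rw [if_neg (fun h => h.2 (Finset.mem_insert_self x _)),
          if_pos ⟨hGmem (Finset.mem_insert_self x _), hc.2⟩]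
        rw [PySem.Dict.get?_insert]
        simp
      · rw [PySem.Dict.get?_insert]
        rw [if_neg hxq]
        by_cases hxm : x ∈ (L.foldl (fun (st : List (Int × Int) × Finset (Int × Int)) q =>
            if isCell land R C q = true ∧ q ∉ st.2 then (st.1 ++ [q], insert q st.2) else st)
            (Q ++ [q], insert q comp.keys.toFinset)).2
        · by_cases hxk : x ∈ comp.keys.toFinset
          · rw [if_neg (fun h => h.2 (Finset.mem_insert_of_mem hxk)), if_neg (fun h => h.2 hxk)]
          · rw [if_pos ⟨hxm, fun h => hxk (Finset.mem_of_mem_insert_of_ne h hxq)⟩,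
              if_pos ⟨hxm, hxk⟩]
        · rw [if_neg (fun h => hxm h.1), if_neg (fun h => hxm h.1)]
    · rw [if_neg (fun h => hc (hcond.1 h)), if_neg hc]
      exact ih Q comp hnd

theorem bLoop_sim (land : List (List Int)) (R C lbl : Int) :
    ∀ (fuel : Nat) (Q : List (Int × Int)) (comp : PySem.Dict (Int × Int) Int)
      (size : Int) (n : Nat),
      comp.keys.Nodup →
      ((bLoop land R C lbl fuel Q comp size).1).keys.toFinset
        = (floodG land R C fuel Q comp.keys.toFinset n).1 ∧
      ((bLoop land R C lbl fuel Q comp size).1).keys.Nodup ∧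
      (∀ x, ((bLoop land R C lbl fuel Q comp size).1).get? x
        = if x ∈ (floodG land R C fuel Q comp.keys.toFinset n).1 ∧ x ∉ comp.keys.toFinset
          then some lbl else comp.get? x) ∧
      (bLoop land R C lbl fuel Q comp size).2
        = size + ((floodG land R C fuel Q comp.keys.toFinset n).2 : Int) - (n : Int) := by
  intro fuel
  induction fuel with
  | zero =>
    intro Q comp size n hnd
    refine ⟨rfl, hnd, ?_, by simp [bLoop, floodG]⟩
    intro x
    rw [show (floodG land R C 0 Q comp.keys.toFinset n).1 = comp.keys.toFinset from rfl,
      if_neg (fun h => h.2 h.1)]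
    rfl
  | succ fuel ih =>
    intro Q comp size n hnd
    match Q with
    | [] =>
      refine ⟨rfl, hnd, ?_, by simp [bLoop, floodG]⟩
      intro x
      rw [show (floodG land R C (fuel+1) [] comp.keys.toFinset n).1 = comp.keys.toFinset from rfl,
        if_neg (fun h => h.2 h.1)]
      rfl
    | p :: Qt =>
      obtain ⟨e1, e2, e3, e4⟩ := foldB_foldG land R C lbl (bNbrs p) Qt comp hnd
      obtain ⟨D, hstG, -, -, -, -⟩ := stepFold_spec land R C (bNbrs p) Qt comp.keys.toFinset
      have hbstep : bLoop land R C lbl (fuel + 1) (p :: Qt) comp size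
          = bLoop land R C lbl fuel
            ((bNbrs p).foldl (fun (st : List (Int × Int) × PySem.Dict (Int × Int) Int) n =>
              if 0 ≤ n.1 ∧ n.1 < R ∧ 0 ≤ n.2 ∧ n.2 < C ∧ bGet land n.1 n.2 ≠ 0 ∧
                  st.2.contains n = false then
                (st.1 ++ [n], st.2.insert n lbl)
              else st) (Qt, comp)).1
            ((bNbrs p).foldl (fun (st : List (Int × Int) × PySem.Dict (Int × Int) Int) n =>
              if 0 ≤ n.1 ∧ n.1 < R ∧ 0 ≤ n.2 ∧ n.2 < C ∧ bGet land n.1 n.2 ≠ 0 ∧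
                  st.2.contains n = false then
                (st.1 ++ [n], st.2.insert n lbl)
              else st) (Qt, comp)).2
            (size + 1) := by
        rw [bLoop]
      rw [hbstep, floodG_step, e1]
      obtain ⟨d1, d2, d3, d4⟩ := ih _ _ (size + 1) (n + 1) e3
      rw [e2] at d1 d3 d4
      refine ⟨d1, d2, ?_, ?_⟩
      · intro x
        rw [d3 x, e4 x]
        have hsub : (((bNbrs p).foldl (fun (st : List (Int × Int) × Finset (Int × Int)) q =>
            if isCell land R C q = true ∧ q ∉ st.2 then (st.1 ++ [q], insert q st.2) else st)
            (Qt, comp.keys.toFinset)).2)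
            ⊆ (floodG land R C fuel
              (((bNbrs p).foldl (fun (st : List (Int × Int) × Finset (Int × Int)) q =>
                if isCell land R C q = true ∧ q ∉ st.2 then (st.1 ++ [q], insert q st.2) else st)
                (Qt, comp.keys.toFinset)).1)
              (((bNbrs p).foldl (fun (st : List (Int × Int) × Finset (Int × Int)) q =>
                if isCell land R C q = true ∧ q ∉ st.2 then (st.1 ++ [q], insert q st.2) else st)
                (Qt, comp.keys.toFinset)).2) (n + 1)).1 := floodG_mono land R C fuel _ _ _
        have hsub0 : comp.keys.toFinset ⊆ (((bNbrs p).foldl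
            (fun (st : List (Int × Int) × Finset (Int × Int)) q =>
              if isCell land R C q = true ∧ q ∉ st.2 then (st.1 ++ [q], insert q st.2) else st)
            (Qt, comp.keys.toFinset)).2) := by
          rw [hstG]
          exact fun x hx => Finset.mem_union_left _ hx
        by_cases hW : x ∈ (floodG land R C fuel
              (((bNbrs p).foldl (fun (st : List (Int × Int) × Finset (Int × Int)) q =>
                if isCell land R C q = true ∧ q ∉ st.2 then (st.1 ++ [q], insert q st.2) else st)
                (Qt, comp.keys.toFinset)).1)
              (((bNbrs p).foldl (fun (st : List (Int × Int) × Finset (Int × Int)) q =>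
                if isCell land R C q = true ∧ q ∉ st.2 then (st.1 ++ [q], insert q st.2) else st)
                (Qt, comp.keys.toFinset)).2) (n + 1)).1
        · by_cases hk : x ∈ comp.keys.toFinset
          · rw [if_neg (fun h => h.2 (hsub0 hk)), if_neg (fun h => h.2 hk), if_neg (fun h => h.2 hk)]
          · by_cases hmid : x ∈ (((bNbrs p).foldl
                (fun (st : List (Int × Int) × Finset (Int × Int)) q =>
                  if isCell land R C q = true ∧ q ∉ st.2 then (st.1 ++ [q], insert q st.2) else st)
                (Qt, comp.keys.toFinset)).2)
            · rw [if_neg (fun h => h.2 hmid), if_pos ⟨hmid, hk⟩, if_pos ⟨hW, hk⟩]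
            · rw [if_pos ⟨hW, hmid⟩, if_pos ⟨hW, hk⟩]
        · rw [if_neg (fun h => hW h.1)]
          have hnm : x ∉ (((bNbrs p).foldl
              (fun (st : List (Int × Int) × Finset (Int × Int)) q =>
                if isCell land R C q = true ∧ q ∉ st.2 then (st.1 ++ [q], insert q st.2) else st)
              (Qt, comp.keys.toFinset)).2) := fun h => hW (hsub h)
          rw [if_neg (fun h => hnm h.1), if_neg (fun h => hW h.1)]
      · rw [d4]
        push_cast
        ring
theorem mem_keysF_iff {comp : PySem.Dict (Int × Int) Int} {x : Int × Int} :
    x ∈ comp.keys.toFinset ↔ (comp.get? x).isSome = true := by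
  rw [List.mem_toFinset, ← PySem.Dict.contains_iff_mem_keys, PySem.Dict.contains_eq_isSome_get?]

def GoodState (land : List (List Int)) (R C : Int)
    (comp : PySem.Dict (Int × Int) Int) (sizes : List Int) : Prop :=
  comp.keys.Nodup ∧
  (∀ x l, comp.get? x = some l → x ∈ cellsF land R C) ∧
  (∀ x l, comp.get? x = some l → ∃ k : Nat, l = (k : Int) ∧ k < sizes.length) ∧
  (∀ k : Nat, k < sizes.length → ∃ s ∈ cellsF land R C,
    (∀ x, comp.get? x = some ((k : Nat) : Int) ↔ x ∈ reachSet land R C {s}) ∧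
    sizes.getD k 0 = ((reachSet land R C {s}).card : Int))

-- the class of a labelled cell is exactly the reach set of that cell
theorem GoodState_class_self {land : List (List Int)} {R C : Int}
    {comp : PySem.Dict (Int × Int) Int} {sizes : List Int}
    (good : GoodState land R C comp sizes) {x : Int × Int} {k : Nat}
    (hx : comp.get? x = some ((k : Nat) : Int)) :
    k < sizes.length ∧
    (∀ y, comp.get? y = some ((k : Nat) : Int) ↔ y ∈ reachSet land R C {x}) ∧
    sizes.getD k 0 = ((reachSet land R C {x}).card : Int) := by
  obtain ⟨k', hk'eq, hk'⟩ := good.2.2.1 x _ hx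
  have hkk : k = k' := by exact_mod_cast hk'eq
  subst hkk
  obtain ⟨s, hs, hiff, hsz⟩ := good.2.2.2 k hk'
  have hxr : x ∈ reachSet land R C {s} := (hiff x).1 hx
  have he := reachSet_singleton_eq_of_mem hxr
  refine ⟨hk', ?_, by rw [← he]; exact hsz⟩
  intro y
  rw [hiff y, he]

-- one labelling step (a fresh land cell found): the whole component gets the new label
theorem labelStep (land : List (List Int)) (R C : Int)
    (comp : PySem.Dict (Int × Int) Int) (sizes : List Int)
    (good : GoodState land R C comp sizes) (p : Int × Int)
    (hic : isCell land R C p = true) (hcf : comp.contains p = false) :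
    GoodState land R C
      (bLoop land R C (sizes.length : Int) (5 * R.toNat * C.toNat + R.toNat + 1)
        [p] (comp.insert p (sizes.length : Int)) 0).1
      (sizes ++ [(bLoop land R C (sizes.length : Int) (5 * R.toNat * C.toNat + R.toNat + 1)
        [p] (comp.insert p (sizes.length : Int)) 0).2]) ∧
    (∀ x, (comp.get? x).isSome = true →
      (bLoop land R C (sizes.length : Int) (5 * R.toNat * C.toNat + R.toNat + 1)
        [p] (comp.insert p (sizes.length : Int)) 0).1.get? x = comp.get? x) ∧
    ((bLoop land R C (sizes.length : Int) (5 * R.toNat * C.toNat + R.toNat + 1)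
        [p] (comp.insert p (sizes.length : Int)) 0).1.get? p).isSome = true := by
  have hcell : p ∈ cellsF land R C := mem_cellsF.2 hic
  have hnotin : p ∉ comp.keys.toFinset := by
    rw [mem_keysF_iff]
    rw [PySem.Dict.contains_eq_isSome_get?] at hcf
    simp [hcf]
  have hkeysub : comp.keys.toFinset ⊆ cellsF land R C := by
    intro x hx
    obtain ⟨l, hl⟩ := Option.isSome_iff_exists.1 (mem_keysF_iff.1 hx)
    exact good.2.1 x l hl
  have hkeys : (comp.insert p (sizes.length : Int)).keys.toFinset
      = insert p comp.keys.toFinset := by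
    rw [PySem.Dict.keys_insert_of_not_contains comp _ hcf, List.toFinset_append]
    simp [Finset.union_comm]
  have hnd' : (comp.insert p (sizes.length : Int)).keys.Nodup :=
    PySem.Dict.nodup_keys_insert comp _ _ good.1
  -- the flood-fill invariants
  have h1 : ∀ q ∈ [p], q ∈ insert p comp.keys.toFinset := by
    intro q hq
    rw [List.mem_singleton.1 hq]
    exact Finset.mem_insert_self p _
  have h2 : insert p comp.keys.toFinset ⊆ cellsF land R C := by
    intro x hx
    rcases Finset.mem_insert.1 hx with rfl | hx
    · exact hcell
    · exact hkeysub hx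
  have h4 : ∀ x ∈ insert p comp.keys.toFinset, x ∉ [p] →
      ∀ y, adjStep land R C x y → y ∈ insert p comp.keys.toFinset := by
    intro x hx hnx y hxy
    rcases Finset.mem_insert.1 hx with rfl | hx
    · exact absurd (List.mem_singleton.2 rfl) hnx
    · obtain ⟨l, hl⟩ := Option.isSome_iff_exists.1 (mem_keysF_iff.1 hx)
      obtain ⟨k, rfl, hk⟩ := good.2.2.1 x l hl
      obtain ⟨-, hiff, -⟩ := GoodState_class_self good hl
      have hyr : y ∈ reachSet land R C {x} :=
        mem_reachSet_step (((hiff x).1 hl)) hxy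
      have : comp.get? y = some ((k : Nat) : Int) := (hiff y).2 hyr
      exact Finset.mem_insert_of_mem (mem_keysF_iff.2 (by simp [this]))
  have hR1 : 1 ≤ R.toNat := by
    obtain ⟨a1, a2, -⟩ := isCell_iff.1 hic
    omega
  have hfuel : 5 * ((cellsF land R C).card - (insert p comp.keys.toFinset).card)
      + ([p] : List (Int × Int)).length + 1 ≤ 5 * R.toNat * C.toNat + R.toNat + 1 := by
    have hb1 := card_cellsF_le land R C
    have hb3 : 5 * R.toNat * C.toNat = 5 * (R.toNat * C.toNat) := by ring
    simp only [List.length_singleton]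
    omega
  have hseed : (([p] : List (Int × Int)).toFinset) = ({p} : Finset (Int × Int)) := by simp
  obtain ⟨hW, hm⟩ := floodG_result land R C (5 * R.toNat * C.toNat + R.toNat + 1) [p]
    (insert p comp.keys.toFinset) 0 h1 h2 (List.nodup_singleton p) h4 hfuel
  rw [hseed] at hW hm
  obtain ⟨c1, c2, c3, c4⟩ := bLoop_sim land R C (sizes.length : Int)
    (5 * R.toNat * C.toNat + R.toNat + 1) [p] (comp.insert p (sizes.length : Int)) 0 0 hnd'
  rw [hkeys] at c1 c3 c4
  rw [hW] at c1 c3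
  -- disjointness of the new component from everything already labelled
  have hdisj : ∀ y ∈ reachSet land R C {p}, y ∉ comp.keys.toFinset := by
    intro y hy hyk
    obtain ⟨l, hl⟩ := Option.isSome_iff_exists.1 (mem_keysF_iff.1 hyk)
    obtain ⟨k, rfl, hk⟩ := good.2.2.1 y l hl
    obtain ⟨-, hiff, -⟩ := GoodState_class_self good hl
    have he1 := reachSet_singleton_eq_of_mem hy
    have hpy : p ∈ reachSet land R C {y} := by
      rw [← he1]
      exact self_mem_reachSet (Finset.mem_singleton_self p) hic
    have : comp.get? p = some ((k : Nat) : Int) := (hiff p).2 hpy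
    exact hnotin (mem_keysF_iff.2 (by simp [this]))
  have hpmem : p ∈ reachSet land R C {p} :=
    self_mem_reachSet (Finset.mem_singleton_self p) hic
  have hWeq : insert p comp.keys.toFinset ∪ reachSet land R C {p}
      = comp.keys.toFinset ∪ reachSet land R C {p} := by
    ext z
    simp only [Finset.mem_union, Finset.mem_insert]
    constructor
    · rintro (( rfl | hz) | hz)
      · exact Or.inr hpmem
      · exact Or.inl hz
      · exact Or.inr hz
    · rintro (hz | hz)
      · exact Or.inl (Or.inr hz)
      · exact Or.inr hz
  have hcardW : (insert p comp.keys.toFinset ∪ reachSet land R C {p}).card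
      = comp.keys.toFinset.card + (reachSet land R C {p}).card := by
    rw [hWeq]
    exact Finset.card_union_of_disjoint (Finset.disjoint_left.2 (fun {a} ha hb => hdisj a hb ha))
  have hcardV : (insert p comp.keys.toFinset).card = comp.keys.toFinset.card + 1 :=
    Finset.card_insert_of_notMem hnotin
  have hmval : (bLoop land R C (sizes.length : Int) (5 * R.toNat * C.toNat + R.toNat + 1)
      [p] (comp.insert p (sizes.length : Int)) 0).2 = ((reachSet land R C {p}).card : Int) := by
    rw [c4]
    simp only [List.length_singleton] at hm ⊢
    have : (floodG land R C (5 * R.toNat * C.toNat + R.toNat + 1) [p]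
        (insert p comp.keys.toFinset) 0).2 = (reachSet land R C {p}).card := by omega
    rw [this]
    push_cast
    ring
  -- the new lookup table
  have hg : ∀ x, (bLoop land R C (sizes.length : Int) (5 * R.toNat * C.toNat + R.toNat + 1)
      [p] (comp.insert p (sizes.length : Int)) 0).1.get? x
      = if x ∈ reachSet land R C {p} then some ((sizes.length : Nat) : Int)
        else comp.get? x := by
    intro x
    rw [c3 x, PySem.Dict.get?_insert]
    by_cases hxr : x ∈ reachSet land R C {p}
    · rw [if_pos hxr]
      by_cases hxp : x = p
      · subst hxp
        rw [if_neg (fun h => h.2 (Finset.mem_insert_self x _)), if_pos rfl]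
      · rw [if_pos ⟨Finset.mem_union_right _ hxr,
          fun h => (hdisj x hxr) (Finset.mem_of_mem_insert_of_ne h hxp)⟩]
    · rw [if_neg hxr]
      have hxp : x ≠ p := fun h => hxr (h ▸ hpmem)
      rw [if_neg hxp]
      by_cases hxV : x ∈ insert p comp.keys.toFinset
      · rw [if_neg (fun h => h.2 hxV)]
      · rw [if_neg (fun h => hxV (by
          rcases Finset.mem_union.1 h.1 with hz | hz
          · exact hz
          · exact absurd hz hxr))]
  refine ⟨⟨c2, ?_, ?_, ?_⟩, ?_, ?_⟩
  · -- labelled cells are land cells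
    intro x l hx
    rw [hg x] at hx
    by_cases hxr : x ∈ reachSet land R C {p}
    · exact reachSet_subset_cellsF hxr
    · rw [if_neg hxr] at hx
      exact good.2.1 x l hx
  · -- labels are indices into sizes
    intro x l hx
    rw [hg x] at hx
    rw [List.length_append, List.length_singleton]
    by_cases hxr : x ∈ reachSet land R C {p}
    · rw [if_pos hxr] at hx
      exact ⟨sizes.length, (Option.some_inj.1 hx).symm, by omega⟩
    · rw [if_neg hxr] at hx
      obtain ⟨k, hkl, hk⟩ := good.2.2.1 x l hx
      exact ⟨k, hkl, by omega⟩
  · -- every label indexes a full component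
    intro k hk
    rw [List.length_append, List.length_singleton] at hk
    by_cases hke : k = sizes.length
    · subst hke
      refine ⟨p, hcell, ?_, ?_⟩
      · intro x
        rw [hg x]
        by_cases hxr : x ∈ reachSet land R C {p}
        · simp [hxr]
        · rw [if_neg hxr]
          simp only [hxr, iff_false]
          intro hx
          obtain ⟨k', hkl, hk'⟩ := good.2.2.1 x _ hx
          have : sizes.length = k' := by exact_mod_cast hkl
          omega
      · rw [List.getD_eq_getElem?_getD, List.getElem?_concat_length, Option.getD_some, hmval]
    · have hklt : k < sizes.length := by omega
      obtain ⟨s, hs, hiff, hsz⟩ := good.2.2.2 k hklt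
      refine ⟨s, hs, ?_, ?_⟩
      · intro x
        rw [hg x]
        by_cases hxr : x ∈ reachSet land R C {p}
        · rw [if_pos hxr]
          constructor
          · intro hx
            have : sizes.length = k := by exact_mod_cast Option.some_inj.1 hx
            omega
          · intro hx
            have : comp.get? x = some ((k : Nat) : Int) := (hiff x).2 hx
            have hxk : x ∈ comp.keys.toFinset := mem_keysF_iff.2 (by simp [this])
            exact absurd hxk (hdisj x hxr)
        · rw [if_neg hxr]
          exact hiff x
      · rw [List.getD_eq_getElem?_getD, List.getElem?_append_left hklt,
          ← List.getD_eq_getElem?_getD]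
        exact hsz
  · -- old labels survive
    intro x hx
    rw [hg x]
    have hxk : x ∈ comp.keys.toFinset := mem_keysF_iff.2 hx
    rw [if_neg (fun hxr => hdisj x hxr hxk)]
  · -- p itself is labelled now
    rw [hg p, if_pos hpmem]
    rfl
-- one cell of B's labelling scan, as a function of the cell
def bScan (land : List (List Int)) (R C : Int)
    (st : PySem.Dict (Int × Int) Int × List Int) (p : Int × Int) :
    PySem.Dict (Int × Int) Int × List Int :=
  if bGet land p.1 p.2 ≠ 0 ∧ st.1.contains p = false then
    ((bLoop land R C (st.2.length : Int) (5 * R.toNat * C.toNat + R.toNat + 1)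
        [p] (st.1.insert p (st.2.length : Int)) 0).1,
      st.2 ++ [(bLoop land R C (st.2.length : Int) (5 * R.toNat * C.toNat + R.toNat + 1)
        [p] (st.1.insert p (st.2.length : Int)) 0).2])
  else st

theorem labelFold (land : List (List Int)) (R C : Int) (L : List (Int × Int)) :
    ∀ (comp : PySem.Dict (Int × Int) Int) (sizes : List Int),
      GoodState land R C comp sizes →
      (∀ p ∈ L, 0 ≤ p.1 ∧ p.1 < R ∧ 0 ≤ p.2 ∧ p.2 < C) →
      GoodState land R C (L.foldl (bScan land R C) (comp, sizes)).1
        (L.foldl (bScan land R C) (comp, sizes)).2 ∧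
      (∀ x, (comp.get? x).isSome = true →
        (L.foldl (bScan land R C) (comp, sizes)).1.get? x = comp.get? x) ∧
      (∀ p ∈ L, p ∈ cellsF land R C →
        ((L.foldl (bScan land R C) (comp, sizes)).1.get? p).isSome = true) := by
  induction L with
  | nil =>
    intro comp sizes good _
    exact ⟨good, fun x _ => rfl, by simp⟩
  | cons p L ih =>
    intro comp sizes good hbnd
    rw [List.foldl_cons]
    by_cases hc : bGet land p.1 p.2 ≠ 0 ∧ comp.contains p = false
    · have hb := hbnd p (List.mem_cons_self ..)
      have hic : isCell land R C p = true :=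
        isCell_iff.2 ⟨hb.1, hb.2.1, hb.2.2.1, hb.2.2.2, hc.1⟩
      obtain ⟨good', hpres, hpl⟩ := labelStep land R C comp sizes good p hic hc.2
      have hscan : bScan land R C (comp, sizes) p
          = ((bLoop land R C (sizes.length : Int) (5 * R.toNat * C.toNat + R.toNat + 1)
              [p] (comp.insert p (sizes.length : Int)) 0).1,
            sizes ++ [(bLoop land R C (sizes.length : Int) (5 * R.toNat * C.toNat + R.toNat + 1)
              [p] (comp.insert p (sizes.length : Int)) 0).2]) := by
        rw [bScan, if_pos hc]
      rw [hscan]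
      obtain ⟨g2, pr2, cov2⟩ := ih _ _ good'
        (fun q hq => hbnd q (List.mem_cons_of_mem _ hq))
      refine ⟨g2, ?_, ?_⟩
      · intro x hx
        rw [pr2 x (by rw [hpres x hx]; exact hx), hpres x hx]
      · intro q hq hqc
        rcases List.mem_cons.1 hq with rfl | hq
        · rw [pr2 q hpl]
          exact hpl
        · exact cov2 q hq hqc
    · have hscan : bScan land R C (comp, sizes) p = (comp, sizes) := by
        rw [bScan, if_neg hc]
      rw [hscan]
      obtain ⟨g2, pr2, cov2⟩ := ih comp sizes good
        (fun q hq => hbnd q (List.mem_cons_of_mem _ hq))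
      refine ⟨g2, pr2, ?_⟩
      intro q hq hqc
      rcases List.mem_cons.1 hq with rfl | hq
      · have hl : bGet land q.1 q.2 ≠ 0 := (isCell_iff.1 (mem_cellsF.1 hqc)).2.2.2.2
        have hcontains : q ∈ comp.keys.toFinset := by
          by_contra hnk
          apply hc
          refine ⟨hl, ?_⟩
          cases hcc : comp.contains q with
          | false => rfl
          | true =>
            exact absurd (List.mem_toFinset.2
              ((PySem.Dict.contains_iff_mem_keys comp q).1 hcc)) hnk
        have hsome := mem_keysF_iff.1 hcontains
        rw [pr2 q hsome]
        exact hsome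
      · exact cov2 q hq hqc

theorem foldl_nested {α : Type} (g : α → (Int × Int) → α) (rs cs : List Int) :
    ∀ (init : α),
      rs.foldl (fun st r => cs.foldl (fun st c => g st (r, c)) st) init
        = (rs.flatMap (fun r => cs.map (fun c => ((r, c) : Int × Int)))).foldl g init := by
  induction rs with
  | nil => intro init; rfl
  | cons r rs ih =>
    intro init
    rw [List.foldl_cons, List.flatMap_cons, List.foldl_append, List.foldl_map]
    exact ih _

theorem bLabel_eq (land : List (List Int)) (R C : Int) :
    bLabel land R C = ((PySem.List.pyRange 0 R 1).flatMap
      (fun r => (PySem.List.pyRange 0 C 1).map (fun c => ((r, c) : Int × Int)))).foldl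
      (bScan land R C) (PySem.Dict.empty, []) := by
  show (PySem.List.pyRange 0 R 1).foldl
      (fun st r => (PySem.List.pyRange 0 C 1).foldl (fun st c => bScan land R C st (r, c)) st)
      (PySem.Dict.empty, []) = _
  exact foldl_nested _ _ _ _

theorem GoodState_empty (land : List (List Int)) (R C : Int) :
    GoodState land R C PySem.Dict.empty [] := by
  refine ⟨PySem.Dict.nodup_keys_empty, ?_, ?_, ?_⟩
  · intro x l hx
    rw [PySem.Dict.get?_empty] at hx
    exact absurd hx (by simp)
  · intro x l hx
    rw [PySem.Dict.get?_empty] at hx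
    exact absurd hx (by simp)
  · intro k hk
    simp at hk

theorem bLabel_good (land : List (List Int)) (R C : Int) :
    GoodState land R C (bLabel land R C).1 (bLabel land R C).2 ∧
    (∀ p ∈ cellsF land R C, (((bLabel land R C).1).get? p).isSome = true) := by
  rw [bLabel_eq]
  have hbnd : ∀ p ∈ (PySem.List.pyRange 0 R 1).flatMap
      (fun r => (PySem.List.pyRange 0 C 1).map (fun c => ((r, c) : Int × Int))),
      0 ≤ p.1 ∧ p.1 < R ∧ 0 ≤ p.2 ∧ p.2 < C := by
    intro p hp
    obtain ⟨r, hr, hp2⟩ := List.mem_flatMap.1 hp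
    obtain ⟨c, hcm, hpe⟩ := List.mem_map.1 hp2
    obtain ⟨hr0, hr1⟩ := PySem.List.mem_pyRange_one.1 hr
    obtain ⟨hc0, hc1⟩ := PySem.List.mem_pyRange_one.1 hcm
    rw [← hpe]
    exact ⟨hr0, hr1, hc0, hc1⟩
  obtain ⟨g, pr, cov⟩ := labelFold land R C _ PySem.Dict.empty []
    (GoodState_empty land R C) hbnd
  refine ⟨g, ?_⟩
  intro p hp
  obtain ⟨h1, h2, h3, h4, -⟩ := isCell_iff.1 (mem_cellsF.1 hp)
  refine cov p ?_ hp
  rw [List.mem_flatMap]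
  refine ⟨p.1, PySem.List.mem_pyRange_one.2 ⟨h1, h2⟩, ?_⟩
  rw [List.mem_map]
  exact ⟨p.2, PySem.List.mem_pyRange_one.2 ⟨h3, h4⟩, rfl⟩
theorem colFold (land : List (List Int)) (R C : Int)
    (comp : PySem.Dict (Int × Int) Int) (sizes : List Int)
    (good : GoodState land R C comp sizes)
    (cov : ∀ p ∈ cellsF land R C, (comp.get? p).isSome = true)
    (c : Int) (hc0 : 0 ≤ c) (hc1 : c < C) :
    ∀ (rs : List Int), (∀ r ∈ rs, 0 ≤ r ∧ r < R) →
    ∀ (acc : Int) (seen : PySem.Set Int) (S : Finset (Int × Int)),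
      S ⊆ cellsF land R C →
      (∀ l : Int, l ∈ seen ↔ ∃ x ∈ S, comp.get? x = some l) →
      acc = ((reachSet land R C S).card : Int) →
      (rs.foldl (fun (st : Int × PySem.Set Int) r =>
        if bGet land r c ≠ 0 then
          let lbl := comp.getD (r, c) 0
          if PySem.Set.contains st.2 lbl = false then
            (st.1 + PySem.List.pyGetD sizes lbl 0, PySem.Set.add st.2 lbl)
          else st
        else st) (acc, seen)).1
      = ((reachSet land R C (S ∪ ((rs.filter (fun r => isCell land R C (r, c))).map
          (fun r => ((r, c) : Int × Int))).toFinset)).card : Int) := by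
  intro rs
  induction rs with
  | nil =>
    intro _ acc seen S _ _ hacc
    simpa using hacc
  | cons r rs ih =>
    intro hbnd acc seen S hS hseen hacc
    have hb := hbnd r (List.mem_cons_self ..)
    by_cases hl : bGet land r c ≠ 0
    · have hic : isCell land R C ((r, c) : Int × Int) = true :=
        isCell_iff.2 ⟨hb.1, hb.2, hc0, hc1, hl⟩
      have hcell : ((r, c) : Int × Int) ∈ cellsF land R C := mem_cellsF.2 hic
      obtain ⟨l, hgl⟩ := Option.isSome_iff_exists.1 (cov _ hcell)
      obtain ⟨k, rfl, hk⟩ := good.2.2.1 _ l hgl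
      obtain ⟨-, hiff, hsz⟩ := GoodState_class_self good hgl
      have hlblval : comp.getD ((r, c) : Int × Int) 0 = ((k : Nat) : Int) := by
        rw [PySem.Dict.getD_eq_get?_getD, hgl]
        rfl
      have hstep : (r :: rs).foldl (fun (st : Int × PySem.Set Int) r =>
          if bGet land r c ≠ 0 then
            let lbl := comp.getD (r, c) 0
            if PySem.Set.contains st.2 lbl = false then
              (st.1 + PySem.List.pyGetD sizes lbl 0, PySem.Set.add st.2 lbl)
            else st
          else st) (acc, seen)
          = rs.foldl (fun (st : Int × PySem.Set Int) r =>
          if bGet land r c ≠ 0 then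
            let lbl := comp.getD (r, c) 0
            if PySem.Set.contains st.2 lbl = false then
              (st.1 + PySem.List.pyGetD sizes lbl 0, PySem.Set.add st.2 lbl)
            else st
          else st)
          (if PySem.Set.contains seen ((k : Nat) : Int) = false then
              (acc + PySem.List.pyGetD sizes ((k : Nat) : Int) 0,
                PySem.Set.add seen ((k : Nat) : Int))
            else (acc, seen)) := by
        rw [List.foldl_cons]
        congr 1
        show (if bGet land r c ≠ 0 then
            if PySem.Set.contains seen (comp.getD ((r, c) : Int × Int) 0) = false then
              (acc + PySem.List.pyGetD sizes (comp.getD ((r, c) : Int × Int) 0) 0,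
                PySem.Set.add seen (comp.getD ((r, c) : Int × Int) 0))
            else (acc, seen)
          else (acc, seen)) = _
        rw [if_pos hl, hlblval]
      rw [hstep]
      have hrcmem : ((r, c) : Int × Int) ∈ reachSet land R C {((r, c) : Int × Int)} :=
        self_mem_reachSet (Finset.mem_singleton_self _) hic
      have hfilter : ((r :: rs).filter (fun r => isCell land R C (r, c))).map
          (fun r => ((r, c) : Int × Int))
          = ((r, c) : Int × Int) :: ((rs.filter (fun r => isCell land R C (r, c))).map
            (fun r => ((r, c) : Int × Int))) := by
        rw [List.filter_cons, if_pos hic, List.map_cons]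
      by_cases hsn : PySem.Set.contains seen ((k : Nat) : Int) = false
      · rw [if_pos hsn]
        have hnotseen : ((k : Nat) : Int) ∉ seen := by
          intro hmem
          rw [(PySem.Set.contains_iff seen _).2 hmem] at hsn
          cases hsn
        -- the component of (r, c) is disjoint from everything already counted
        have hdisjS : ∀ y ∈ reachSet land R C {((r, c) : Int × Int)},
            y ∉ reachSet land R C S := by
          intro y hy hyS
          obtain ⟨hyc, x, hxS, hreach⟩ := mem_reachSet.1 hyS
          obtain ⟨lx, hgx⟩ := Option.isSome_iff_exists.1 (cov x (hS hxS))
          obtain ⟨kx, rfl, hkx⟩ := good.2.2.1 x lx hgx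
          obtain ⟨-, hiffx, -⟩ := GoodState_class_self good hgx
          have hyx : y ∈ reachSet land R C {x} :=
            mem_reachSet.2 ⟨mem_cellsF.1 (reachSet_subset_cellsF hy), x,
              Finset.mem_singleton_self x, hreach⟩
          have he1 := reachSet_singleton_eq_of_mem hyx
          have he2 := reachSet_singleton_eq_of_mem hy
          have hrcx : ((r, c) : Int × Int) ∈ reachSet land R C {x} := by
            rw [he1, ← he2]
            exact hrcmem
          have : comp.get? ((r, c) : Int × Int) = some ((kx : Nat) : Int) :=
            (hiffx _).2 hrcx
          have hkk : kx = k := by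
            have := Option.some_inj.1 (this.symm.trans hgl)
            exact_mod_cast this
          subst hkk
          exact hnotseen ((hseen _).2 ⟨x, hxS, hgx⟩)
        have hdisj : Disjoint (reachSet land R C S)
            (reachSet land R C {((r, c) : Int × Int)}) :=
          Finset.disjoint_right.2 (fun {a} hmem => hdisjS a hmem)
        have hcardU : (reachSet land R C (S ∪ {((r, c) : Int × Int)})).card
            = (reachSet land R C S).card
              + (reachSet land R C {((r, c) : Int × Int)}).card := by
          rw [reachSet_union, Finset.card_union_of_disjoint hdisj]
        have hseen' : ∀ l : Int, l ∈ PySem.Set.add seen ((k : Nat) : Int)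
            ↔ ∃ x ∈ S ∪ {((r, c) : Int × Int)}, comp.get? x = some l := by
          intro l
          rw [PySem.Set.mem_add]
          constructor
          · rintro (hm | rfl)
            · obtain ⟨x, hxS, hx⟩ := (hseen l).1 hm
              exact ⟨x, Finset.mem_union_left _ hxS, hx⟩
            · exact ⟨_, Finset.mem_union_right _ (Finset.mem_singleton_self _), hgl⟩
          · rintro ⟨x, hxU, hx⟩
            rcases Finset.mem_union.1 hxU with hxS | hxE
            · exact Or.inl ((hseen l).2 ⟨x, hxS, hx⟩)
            · rw [Finset.mem_singleton.1 hxE] at hx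
              exact Or.inr (Option.some_inj.1 (hx.symm.trans hgl))
        have hacc' : acc + PySem.List.pyGetD sizes ((k : Nat) : Int) 0
            = ((reachSet land R C (S ∪ {((r, c) : Int × Int)})).card : Int) := by
          rw [PySem.List.pyGetD_natCast, hacc, hsz, hcardU]
          push_cast
          ring
        have hS' : S ∪ {((r, c) : Int × Int)} ⊆ cellsF land R C :=
          Finset.union_subset hS (Finset.singleton_subset_iff.2 hcell)
        have hsets : S ∪ {((r, c) : Int × Int)}
            ∪ ((rs.filter (fun r => isCell land R C (r, c))).map
              (fun r => ((r, c) : Int × Int))).toFinset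
            = S ∪ (((r, c) : Int × Int) :: (rs.filter (fun r => isCell land R C (r, c))).map
              (fun r => ((r, c) : Int × Int))).toFinset := by
          rw [List.toFinset_cons]
          ext z
          simp only [Finset.mem_union, Finset.mem_insert, Finset.mem_singleton,
            List.mem_toFinset]
          tauto
        have hfin := ih (fun x hx => hbnd x (List.mem_cons_of_mem _ hx)) _ _ _ hS' hseen' hacc'
        rw [hfin, hfilter, ← hsets]
      · rw [if_neg hsn]
        have hkseen : ((k : Nat) : Int) ∈ seen := by
          cases hcc : PySem.Set.contains seen ((k : Nat) : Int) with
          | false => exact absurd hcc hsn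
          | true => exact (PySem.Set.contains_iff seen _).1 hcc
        obtain ⟨x, hxS, hgx⟩ := (hseen _).1 hkseen
        obtain ⟨-, hiffx, -⟩ := GoodState_class_self good hgx
        have hrcx : ((r, c) : Int × Int) ∈ reachSet land R C {x} := (hiffx _).1 hgl
        have he := reachSet_singleton_eq_of_mem hrcx
        have hsub : reachSet land R C {((r, c) : Int × Int)} ⊆ reachSet land R C S := by
          rw [← he]
          apply reachSet_seeds_subset
          intro s hs
          rw [Finset.mem_singleton.1 hs]
          exact ⟨x, hxS, Relation.ReflTransGen.refl⟩
        have hSeq : reachSet land R C (S ∪ {((r, c) : Int × Int)})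
            = reachSet land R C S := by
          rw [reachSet_union]
          exact Finset.union_eq_left.2 hsub
        have hseen'' : ∀ l : Int, l ∈ seen
            ↔ ∃ x ∈ S ∪ {((r, c) : Int × Int)}, comp.get? x = some l := by
          intro l
          constructor
          · intro hm
            obtain ⟨y, hyS, hy⟩ := (hseen l).1 hm
            exact ⟨y, Finset.mem_union_left _ hyS, hy⟩
          · rintro ⟨y, hyU, hy⟩
            rcases Finset.mem_union.1 hyU with hyS | hyE
            · exact (hseen l).2 ⟨y, hyS, hy⟩
            · rw [Finset.mem_singleton.1 hyE] at hy
              rw [Option.some_inj.1 (hy.symm.trans hgl)]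
              exact hkseen
        have hacc'' : acc = ((reachSet land R C (S ∪ {((r, c) : Int × Int)})).card : Int) := by
          rw [hSeq]
          exact hacc
        have hS' : S ∪ {((r, c) : Int × Int)} ⊆ cellsF land R C :=
          Finset.union_subset hS (Finset.singleton_subset_iff.2 hcell)
        have hsets : S ∪ {((r, c) : Int × Int)}
            ∪ ((rs.filter (fun r => isCell land R C (r, c))).map
              (fun r => ((r, c) : Int × Int))).toFinset
            = S ∪ (((r, c) : Int × Int) :: (rs.filter (fun r => isCell land R C (r, c))).map
              (fun r => ((r, c) : Int × Int))).toFinset := by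
          rw [List.toFinset_cons]
          ext z
          simp only [Finset.mem_union, Finset.mem_insert, Finset.mem_singleton,
            List.mem_toFinset]
          tauto
        have hfin := ih (fun y hy => hbnd y (List.mem_cons_of_mem _ hy)) _ _ _ hS' hseen'' hacc''
        rw [hfin, hfilter, ← hsets]
    · have hic : isCell land R C ((r, c) : Int × Int) = false := by
        rw [Bool.eq_false_iff]
        intro hcc
        exact hl (isCell_iff.1 hcc).2.2.2.2
      have hstep : (r :: rs).foldl (fun (st : Int × PySem.Set Int) r =>
          if bGet land r c ≠ 0 then
            let lbl := comp.getD (r, c) 0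
            if PySem.Set.contains st.2 lbl = false then
              (st.1 + PySem.List.pyGetD sizes lbl 0, PySem.Set.add st.2 lbl)
            else st
          else st) (acc, seen)
          = rs.foldl (fun (st : Int × PySem.Set Int) r =>
          if bGet land r c ≠ 0 then
            let lbl := comp.getD (r, c) 0
            if PySem.Set.contains st.2 lbl = false then
              (st.1 + PySem.List.pyGetD sizes lbl 0, PySem.Set.add st.2 lbl)
            else st
          else st) (acc, seen) := by
        rw [List.foldl_cons]
        congr 1
        show (if bGet land r c ≠ 0 then
            if PySem.Set.contains seen (comp.getD ((r, c) : Int × Int) 0) = false then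
              (acc + PySem.List.pyGetD sizes (comp.getD ((r, c) : Int × Int) 0) 0,
                PySem.Set.add seen (comp.getD ((r, c) : Int × Int) 0))
            else (acc, seen)
          else (acc, seen)) = _
        rw [if_neg hl]
      rw [hstep]
      have hfilter : ((r :: rs).filter (fun r => isCell land R C (r, c)))
          = rs.filter (fun r => isCell land R C (r, c)) := by
        rw [List.filter_cons, if_neg (by simp [hic])]
      rw [ih (fun y hy => hbnd y (List.mem_cons_of_mem _ hy)) _ _ _ hS hseen hacc, hfilter]

theorem bColSum_eq (land : List (List Int)) (R C : Int)
    (comp : PySem.Dict (Int × Int) Int) (sizes : List Int)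
    (good : GoodState land R C comp sizes)
    (cov : ∀ p ∈ cellsF land R C, (comp.get? p).isSome = true)
    (c : Int) (hc0 : 0 ≤ c) (hc1 : c < C) :
    bColSum land comp sizes R c
      = ((reachSet land R C (colSeeds land R C c)).card : Int) := by
  have hempty : reachSet land R C (∅ : Finset (Int × Int)) = ∅ := by
    ext q
    simp [mem_reachSet]
  have := colFold land R C comp sizes good cov c hc0 hc1 (PySem.List.pyRange 0 R 1)
    (fun r hr => PySem.List.mem_pyRange_one.1 hr) 0 PySem.Set.empty ∅
    (by intro x hx; exact absurd hx (Finset.notMem_empty x))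
    (by intro l; constructor
        · intro h; exact absurd h (List.not_mem_nil)
        · rintro ⟨x, hx, -⟩; exact absurd hx (Finset.notMem_empty x))
    (by rw [hempty]; simp)
  rw [bColSum, this, Finset.empty_union, colSeedsList_toFinset]

theorem solution_eq_alt (land : List (List Int)) : solution land = solution_alt land := by
  obtain ⟨good, cov⟩ := bLabel_good land (land.length : Int)
    ((PySem.List.pyGetD land 0 []).length : Int)
  rw [solution, solution_alt]
  apply PySem.List.foldl_congr_mem
  intro acc x hx
  obtain ⟨hx0, hx1⟩ := PySem.List.mem_pyRange_one.1 hx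
  rw [aBfs_eq land _ _ x hx0 hx1,
    bColSum_eq land _ _ _ _ good cov x hx0 hx1, max_comm]

-- ===== VERDICT (by name: the statement is the Claim_ definition above) =====
theorem solution_spec : Claim_equal_solution := by
  intro land _ _
  exact solution_eq_alt land
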